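-- pv_equiv track=rewrite | github.com/data-weaverss/algorithm | sol/07_dfs_bfs/07_퍼즐조각채우기.py | solution
-- ===== SOURCE A (Python) =====
-- from collections import defaultdict
--
-- def dfs(map, moves, n, cur_row, cur_col, routes):
--     routes.append((cur_row, cur_col))
--     for move_row, move_col in moves:
--         new_row, new_col = cur_row + move_row, cur_col + move_col
--         if 0 <= new_row < n and 0 <= new_col < n:
--             if map[new_row][new_col] == 1 and (new_row, new_col) not in routes:
--                 dfs(map, moves, n, new_row, new_col, routes)
--
-- def extract_puzzle(map, routes):
--     """주어진 좌표를 기반으로 퍼즐 조각 추출"""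
--     row1, row2 = min(r[0] for r in routes), max(r[0] for r in routes)
--     col1, col2 = min(r[1] for r in routes), max(r[1] for r in routes)
--
--     puzzle = [[0] * (col2 - col1 + 1) for _ in range(row2 - row1 + 1)]
--     for row, col in routes:
--         puzzle[row - row1][col - col1] = 1
--         map[row][col] = 0
--     return puzzle
--
-- def generate_rotations(puzzle):
--     """퍼즐 조각의 모든 회전(90도씩)을 생성"""
--     rotations = [puzzle]
--     for _ in range(3):  # 총 3번 회전하여 90도씩 추가
--         rotated = [list(x) for x in zip(*rotations[-1])][::-1]
--         rotations.append(rotated)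
--     return rotations
--
-- def normalize_puzzle(puzzle):
--     """퍼즐을 문자열로 변환하여 비교 가능하게 만듦"""
--     return str(puzzle)
--
-- def solution(game_board, table):
--     n = len(table)
--     moves = ((-1, 0), (1, 0), (0, 1), (0, -1))
--     table_puzzles, board_puzzles = [], []
--
--     # game_board 에서 빈칸을 퍼즐이라 생각하고,
--     # game_board의 퍼즐과 table의 퍼즐 중 몇개가 일치하는지 찾는 것으로 접근
--     for i in range(n): # game_board 0, 1 반전 -> 빈칸을 퍼즐로 여기도록 반전시킴
--         for j in range(n):
--             game_board[i][j] = 1 - game_board[i][j]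
--
--     for row in range(n):
--         for col in range(n):
--             if table[row][col] == 1:  # 테이블에서 퍼즐 찾기
--                 routes = []
--                 dfs(table, moves, n, row, col, routes)
--                 puzzle = extract_puzzle(table, routes)
--                 table_puzzles.append([normalize_puzzle(rot) for rot in generate_rotations(puzzle)])
--             if game_board[row][col] == 1:  # 게임 보드에서 빈 공간 찾기
--                 routes = []
--                 dfs(game_board, moves, n, row, col, routes)
--                 puzzle = extract_puzzle(game_board, routes)
--                 board_puzzles.append(normalize_puzzle(puzzle))
--
--     # 게임 보드 퍼즐 카운트 저장
--     board_puzzles_count = defaultdict(int)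
--     for board_puzzle in board_puzzles:
--         board_puzzles_count[board_puzzle] += 1
--
--     answer = 0
--     for puzzle in table_puzzles:
--         for rotation in puzzle:
--             if board_puzzles_count.get(rotation, 0) > 0:
--                 answer += rotation.count('1')
--                 board_puzzles_count[rotation] -= 1
--                 break
--
--     return answer
-- ===== SOURCE B (Python) =====
-- def solution(game_board, table):
--     n = len(table)
--     for i in range(n):
--         for j in range(n):
--             game_board[i][j] = 1 - game_board[i][j]
--
--     def flood(grid, r0, c0):
--         """Iterative stack flood fill: collect the component's cells, zeroing them."""
--         cells, stack = [], [(r0, c0)]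
--         while stack:
--             r, c = stack.pop()
--             if 0 <= r < n and 0 <= c < n and grid[r][c] == 1:
--                 grid[r][c] = 0
--                 cells.append((r, c))
--                 stack += [(r - 1, c), (r + 1, c), (r, c + 1), (r, c - 1)]
--         return cells
--
--     def key_of(cells):
--         """Render the piece's shape directly from its cell set (no matrix painting)."""
--         cs = set(cells)
--         r0 = min(r for r, _ in cells); r1 = max(r for r, _ in cells)
--         c0 = min(c for _, c in cells); c1 = max(c for _, c in cells)
--         return str([[1 if (r, c) in cs else 0 for c in range(c0, c1 + 1)]
--                     for r in range(r0, r1 + 1)])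
--
--     def rot_keys(cells):
--         """Keys of the 4 rotations, rotating the cell coordinates themselves."""
--         keys = []
--         for _ in range(4):
--             keys.append(key_of(cells))
--             cmax = max(c for _, c in cells)
--             cells = [(cmax - c, r) for r, c in cells]
--         return keys
--
--     table_keys = []
--     for row in range(n):
--         for col in range(n):
--             if table[row][col] == 1:
--                 table_keys.append(rot_keys(flood(table, row, col)))
--
--     counts = {}
--     for row in range(n):
--         for col in range(n):
--             if game_board[row][col] == 1:
--                 k = key_of(flood(game_board, row, col))
--                 counts[k] = counts.get(k, 0) + 1
--
--     answer = 0
--     for keys in table_keys: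
--         k = next((k for k in keys if counts.get(k, 0) > 0), None)
--         if k is not None:
--             answer += k.count('1')
--             counts[k] -= 1
--     return answer
-- ===== Notes on version B (the rewrite author's own statement) =====
-- stated objective: alternative
-- what changed: The recursive DFS is replaced by an iterative stack flood fill that zeroes cells as it visits them; the single interleaved scan is split into two independent passes (table pieces, then board counts into a plain dict); pieces are never painted into an allocated matrix or rotated via zip(*) - the shape key is rendered by a comprehension directly from the cell set and rotations transform the cell coordinates; and the greedy match picks the first usable rotation with next() instead of a break loop.
import Mathlib
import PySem

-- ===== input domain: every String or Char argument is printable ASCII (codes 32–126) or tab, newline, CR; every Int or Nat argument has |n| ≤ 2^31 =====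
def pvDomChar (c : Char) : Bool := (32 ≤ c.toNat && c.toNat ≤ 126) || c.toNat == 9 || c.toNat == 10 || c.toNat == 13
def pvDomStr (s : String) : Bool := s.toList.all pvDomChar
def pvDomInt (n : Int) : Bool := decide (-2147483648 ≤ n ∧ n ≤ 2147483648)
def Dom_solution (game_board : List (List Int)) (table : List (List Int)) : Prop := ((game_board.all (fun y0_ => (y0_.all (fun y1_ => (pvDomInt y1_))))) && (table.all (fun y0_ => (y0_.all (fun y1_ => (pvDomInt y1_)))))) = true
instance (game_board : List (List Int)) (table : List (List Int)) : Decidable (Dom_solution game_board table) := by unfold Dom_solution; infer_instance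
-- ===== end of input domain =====

-- B replaces A's recursive DFS by an iterative stack flood fill that zeroes cells as it
-- visits them, splits A's single interleaved scan into two independent passes (table
-- pieces, then board-hole counts into a plain dict), renders each piece's key directly
-- from its cell set by a comprehension (no allocate-and-paint matrix, no zip(*) matrix
-- rotation: rotations transform the cell coordinates), and picks the first usable
-- rotation with next() (objective: alternative decomposition).  Like A, B mutates its
-- list arguments in Python; the equivalence proved here is about the RETURN value only.

-- ===== SHARED LOW-LEVEL HELPERS (cell reads/writes, min/max, str rendering and the
-- in-place inversion loop are the same Python code in both programs; ported once) =====

/-- `m[r][c]` for indices that are in range on every admitted input (both Pythons only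
ever index after a `0 <= r < n` bounds check, or inside ranges covered by `Pre_`). -/
def cellv (m : List (List Int)) (r c : Int) : Int := (m.getD r.toNat []).getD c.toNat 0

/-- `m[r][c] = v` (in-range on every admitted input, see `cellv`). -/
def setc (m : List (List Int)) (r c : Int) (v : Int) : List (List Int) :=
  m.set r.toNat ((m.getD r.toNat []).set c.toNat v)

/-- `min(...)` of a nonempty int generator (Python raises on empty; never empty here). -/
def pyMinL : List Int → Int
  | [] => 0
  | a :: rest => rest.foldl min a

/-- `max(...)` of a nonempty int generator. -/
def pyMaxL : List Int → Int
  | [] => 0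
  | a :: rest => rest.foldl max a

/-- `str(row)` for a row of ints. -/
def strRowS (r : List Int) : String :=
  "[" ++ String.intercalate ", " (r.map PySem.Int.toStr) ++ "]"

/-- `str(puzzle)` for a matrix of ints (`normalize_puzzle` in A, inline `str` in B). -/
def pyStrMat (m : List (List Int)) : String :=
  "[" ++ String.intercalate ", " (m.map strRowS) ++ "]"

/-- The `game_board` 0/1 inversion double loop (identical in both Pythons). -/
def invertN (n : Int) (g : List (List Int)) : List (List Int) :=
  (PySem.List.pyRange 0 n 1).foldl
    (fun g i => (PySem.List.pyRange 0 n 1).foldl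
      (fun g j => setc g i j (1 - cellv g i j)) g) g

-- ===== PORT A =====

def movesL : List (Int × Int) := [(-1, 0), (1, 0), (0, 1), (0, -1)]

mutual
/-- A's recursive `dfs` (fuel makes the recursion structural; `solution` passes
`n*n+1` fuel, which is proved sufficient below). -/
def dfsA (fuel : Nat) (m : List (List Int)) (n : Int) (cur : Int × Int)
    (routes : List (Int × Int)) : List (Int × Int) :=
  match fuel with
  | 0 => routes
  | fuel + 1 => dfsAmoves fuel m n cur movesL (routes ++ [cur])
termination_by (fuel, 0)

/-- the `for move_row, move_col in moves:` loop inside A's `dfs`. -/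
def dfsAmoves (fuel : Nat) (m : List (List Int)) (n : Int) (cur : Int × Int)
    (mvs : List (Int × Int)) (routes : List (Int × Int)) : List (Int × Int) :=
  match mvs with
  | [] => routes
  | mv :: rest =>
      let nr := cur.1 + mv.1
      let nc := cur.2 + mv.2
      let routes' :=
        if 0 ≤ nr ∧ nr < n ∧ 0 ≤ nc ∧ nc < n then
          if cellv m nr nc = 1 ∧ (nr, nc) ∉ routes then dfsA fuel m n (nr, nc) routes
          else routes
        else routes
      dfsAmoves fuel m n cur rest routes'
termination_by (fuel, mvs.length + 1)
end

def fuelA (n : Int) : Nat := n.toNat * n.toNat + 1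

/-- A's `extract_puzzle`: returns (puzzle, map-with-the-piece-zeroed). -/
def extractA (m : List (List Int)) (routes : List (Int × Int)) :
    List (List Int) × List (List Int) :=
  let row1 := pyMinL (routes.map (·.1))
  let row2 := pyMaxL (routes.map (·.1))
  let col1 := pyMinL (routes.map (·.2))
  let col2 := pyMaxL (routes.map (·.2))
  let puz0 : List (List Int) :=
    List.replicate (row2 - row1 + 1).toNat (List.replicate (col2 - col1 + 1).toNat 0)
  routes.foldl
    (fun pm rc => (setc pm.1 (rc.1 - row1) (rc.2 - col1) 1, setc pm.2 rc.1 rc.2 0))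
    (puz0, m)

theorem zipStar_measure (x : List Int) (m : List (List Int)) (hx : x ≠ []) :
    (((x :: m).map List.tail).map List.length).sum < ((x :: m).map List.length).sum := by
  simp only [List.map_cons, List.sum_cons]
  have h1 : x.tail.length < x.length := by
    cases x with
    | nil => exact absurd rfl hx
    | cons a t => simp
  have h2 : ((m.map List.tail).map List.length).sum ≤ (m.map List.length).sum := by
    induction m with
    | nil => simp
    | cons b l ih =>
        simp only [List.map_cons, List.sum_cons]
        have : b.tail.length ≤ b.length := by cases b <;> simp
        omega
  omega

/-- `zip(*m)` (rows truncated at the shortest, as Python's `zip` does). -/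
def zipStar (m : List (List Int)) : List (List Int) :=
  match h : m with
  | [] => []
  | x :: rest =>
      if hx : x ≠ [] ∧ ∀ r ∈ rest, r ≠ [] then
        ((x :: rest).map (fun r => r.headD 0)) :: zipStar ((x :: rest).map List.tail)
      else []
termination_by (m.map List.length).sum
decreasing_by
  exact zipStar_measure x rest hx.1

/-- `[list(x) for x in zip(*p)][::-1]` — one 90° rotation. -/
def rot90 (p : List (List Int)) : List (List Int) := (zipStar p).reverse

/-- A's `generate_rotations` (the 3-iteration loop unrolled). -/
def genRotsA (p : List (List Int)) : List (List (List Int)) :=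
  let r1 := rot90 p
  let r2 := rot90 r1
  let r3 := rot90 r2
  [p, r1, r2, r3]

/-- The inner `for rotation in puzzle: … break` greedy step of A. -/
def tryRots : List String → Int × PySem.Dict String Int → Int × PySem.Dict String Int
  | [], st => st
  | k :: rest, st =>
      if PySem.Dict.getD st.2 k 0 > 0 then
        (st.1 + (PySem.Str.count k "1" : Int),
         PySem.Dict.insert st.2 k (PySem.Dict.getD st.2 k 0 - 1))
      else tryRots rest st

/-- the `if table[row][col] == 1:` branch of A's loop body (touches table, table_puzzles) -/
def tabStepA (n row col : Int) (tb : List (List Int)) (tp : List (List String)) :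
    List (List Int) × List (List String) :=
  if cellv tb row col = 1 then
    let routes := dfsA (fuelA n) tb n (row, col) []
    let pr := extractA tb routes
    (pr.2, tp ++ [(genRotsA pr.1).map pyStrMat])
  else (tb, tp)

/-- the `if game_board[row][col] == 1:` branch of A's loop body (touches game_board, board_puzzles) -/
def brdStepA (n row col : Int) (gb : List (List Int)) (bp : List String) :
    List (List Int) × List String :=
  if cellv gb row col = 1 then
    let routes := dfsA (fuelA n) gb n (row, col) []
    let pr := extractA gb routes
    (pr.2, bp ++ [pyStrMat pr.1])
  else (gb, bp)

/-- One `(row, col)` iteration of A's scanning loop; state =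
(table, game_board, table_puzzles, board_puzzles). -/
def scanStepA (n row col : Int)
    (st : List (List Int) × List (List Int) × List (List String) × List String) :
    List (List Int) × List (List Int) × List (List String) × List String :=
  ((tabStepA n row col st.1 st.2.2.1).1, (brdStepA n row col st.2.1 st.2.2.2).1,
   (tabStepA n row col st.1 st.2.2.1).2, (brdStepA n row col st.2.1 st.2.2.2).2)

def solution (game_board : List (List Int)) (table : List (List Int)) : Int :=
  let n : Int := table.length
  let gb := invertN n game_board
  let st := (PySem.List.pyRange 0 n 1).foldl
    (fun st row => (PySem.List.pyRange 0 n 1).foldl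
      (fun st col => scanStepA n row col st) st)
    (table, gb, ([] : List (List String)), ([] : List String))
  let counts := st.2.2.2.foldl
    (fun d s => PySem.Dict.insert d s (PySem.Dict.getD d s 0 + 1))
    (PySem.Dict.empty : PySem.Dict String Int)
  (st.2.2.1.foldl (fun st rots => tryRots rots st) ((0 : Int), counts)).1

-- ===== PORT B =====

/-- B's iterative stack flood fill: pop a cell, and if it is an in-bounds 1-cell,
zero it, record it, and push its four neighbours.  Returns (cells, grid).
(fuel makes the loop structural; `solution_alt` passes `4*n*n+2`, proved sufficient). -/
def floodB (fuel : Nat) (grid : List (List Int)) (n : Int)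
    (stack : List (Int × Int)) (cells : List (Int × Int)) :
    List (Int × Int) × List (List Int) :=
  match fuel with
  | 0 => (cells, grid)
  | fuel + 1 =>
      match stack.getLast? with
      | none => (cells, grid)
      | some rc =>
          let stack' := stack.dropLast
          if 0 ≤ rc.1 ∧ rc.1 < n ∧ 0 ≤ rc.2 ∧ rc.2 < n ∧ cellv grid rc.1 rc.2 = 1 then
            floodB fuel (setc grid rc.1 rc.2 0) n
              (stack' ++ [(rc.1 - 1, rc.2), (rc.1 + 1, rc.2), (rc.1, rc.2 + 1), (rc.1, rc.2 - 1)])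
              (cells ++ [rc])
          else floodB fuel grid n stack' cells

def fuelB (n : Int) : Nat := 4 * (n.toNat * n.toNat) + 2

/-- B's shape comprehension `[[1 if (r, c) in cs else 0 for c in range(c0, c1+1)]
for r in range(r0, r1+1)]` (membership in the set `cs` = membership in `cells`). -/
def matOf (r0 r1 c0 c1 : Int) (cells : List (Int × Int)) : List (List Int) :=
  (PySem.List.pyRange r0 (r1 + 1) 1).map (fun r =>
    (PySem.List.pyRange c0 (c1 + 1) 1).map (fun c => if (r, c) ∈ cells then (1 : Int) else 0))

/-- B's `key_of`: bounding box, then `str` of the shape comprehension. -/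
def shapeMat (cells : List (Int × Int)) : List (List Int) :=
  matOf (pyMinL (cells.map (·.1))) (pyMaxL (cells.map (·.1)))
    (pyMinL (cells.map (·.2))) (pyMaxL (cells.map (·.2))) cells

def keyOf (cells : List (Int × Int)) : String := pyStrMat (shapeMat cells)

/-- B's coordinate rotation `[(cmax - c, r) for r, c in cells]`. -/
def rotCells (cells : List (Int × Int)) : List (Int × Int) :=
  cells.map (fun rc => (pyMaxL (cells.map (·.2)) - rc.2, rc.1))

/-- B's `rot_keys` loop: `for _ in range(4): keys.append(key_of(cells)); cells = …`. -/
def rotKeysB : Nat → List (Int × Int) → List String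
  | 0, _ => []
  | k + 1, cells => keyOf cells :: rotKeysB k (rotCells cells)

/-- one `(row, col)` step of B's first pass (table pieces); state = (table, table_keys) -/
def tabStepB (n row col : Int) (st : List (List Int) × List (List String)) :
    List (List Int) × List (List String) :=
  if cellv st.1 row col = 1 then
    let fr := floodB (fuelB n) st.1 n [(row, col)] []
    (fr.2, st.2 ++ [rotKeysB 4 fr.1])
  else st

/-- one `(row, col)` step of B's second pass (board holes); state = (game_board, counts) -/
def brdStepB (n row col : Int) (st : List (List Int) × PySem.Dict String Int) :
    List (List Int) × PySem.Dict String Int :=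
  if cellv st.1 row col = 1 then
    let fr := floodB (fuelB n) st.1 n [(row, col)] []
    let k := keyOf fr.1
    (fr.2, PySem.Dict.insert st.2 k (PySem.Dict.getD st.2 k 0 + 1))
  else st

/-- B's greedy step: `next((k for k in keys if counts.get(k, 0) > 0), None)`, then
add the key's '1'-count and decrement. -/
def matchStep (st : Int × PySem.Dict String Int) (keys : List String) :
    Int × PySem.Dict String Int :=
  match keys.find? (fun k => decide (PySem.Dict.getD st.2 k 0 > 0)) with
  | none => st
  | some k => (st.1 + (PySem.Str.count k "1" : Int),
      PySem.Dict.insert st.2 k (PySem.Dict.getD st.2 k 0 - 1))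

def solution_alt (game_board : List (List Int)) (table : List (List Int)) : Int :=
  let n : Int := table.length
  let gb := invertN n game_board
  let t1 := (PySem.List.pyRange 0 n 1).foldl
    (fun st row => (PySem.List.pyRange 0 n 1).foldl
      (fun st col => tabStepB n row col st) st)
    (table, ([] : List (List String)))
  let b1 := (PySem.List.pyRange 0 n 1).foldl
    (fun st row => (PySem.List.pyRange 0 n 1).foldl
      (fun st col => brdStepB n row col st) st)
    (gb, (PySem.Dict.empty : PySem.Dict String Int))
  (t1.2.foldl matchStep ((0 : Int), b1.2)).1

-- ===== PRECONDITION & SPEC =====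

-- Pre_: exactly the inputs where Python A returns normally: the scan indexes the first
-- `len(table)` rows and columns of both boards, so `game_board` needs at least that many
-- rows and the accessed rows of both boards need at least that many columns
-- (otherwise A raises IndexError).
def Pre_solution (game_board : List (List Int)) (table : List (List Int)) : Prop :=
  table.length ≤ game_board.length ∧
  (∀ r ∈ game_board.take table.length, table.length ≤ r.length) ∧
  (∀ r ∈ table, table.length ≤ r.length)
instance (game_board : List (List Int)) (table : List (List Int)) :
    Decidable (Pre_solution game_board table) := by unfold Pre_solution; infer_instance

def pvWitness_solution : List (List Int) × List (List Int) :=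
  ([[1, 0], [0, 1]], [[1, 0], [0, 0]])

def Spec_solution (game_board : List (List Int)) (table : List (List Int)) (out : Int) : Prop := out = solution_alt game_board table
instance (game_board : List (List Int)) (table : List (List Int)) (out : Int) : Decidable (Spec_solution game_board table out) := by unfold Spec_solution; infer_instance

-- ===== CLAIM (what is proved, stated in full; the proofs are below) =====
def Claim_equal_solution : Prop := ∀ (game_board : List (List Int)) (table : List (List Int)), Dom_solution game_board table → Pre_solution game_board table → Spec_solution game_board table (solution game_board table)

-- ===== LEMMAS AND PROOFS =====


/-- `0 ≤ r < n` and `0 ≤ c < n` for a cell `(r, c)`. -/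
def inb (n : Int) (x : Int × Int) : Prop :=
  0 ≤ x.1 ∧ x.1 < n ∧ 0 ≤ x.2 ∧ x.2 < n

/-- The grid has at least `n` rows and its first `n` rows have at least `n` columns. -/
def GridOK (n : Int) (m : List (List Int)) : Prop :=
  n ≤ (m.length : Int) ∧ ∀ i : Nat, (i : Int) < n → n ≤ ((m.getD i []).length : Int)

/-- orthogonal adjacency, in the order A's `moves` / B's pushes list the neighbours -/
def adjM (x y : Int × Int) : Prop :=
  y = (x.1 - 1, x.2) ∨ y = (x.1 + 1, x.2) ∨ y = (x.1, x.2 + 1) ∨ y = (x.1, x.2 - 1)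

/-- cells reachable from `s` by steps into in-bounds 1-cells of `m` -/
inductive ReachP (m : List (List Int)) (n : Int) (s : Int × Int) : Int × Int → Prop
  | refl : ReachP m n s s
  | step (x y : Int × Int) : ReachP m n s x → adjM x y → inb n y →
      cellv m y.1 y.2 = 1 → ReachP m n s y

theorem ReachP_trans (m : List (List Int)) (n : Int) (a b c : Int × Int)
    (h1 : ReachP m n a b) (h2 : ReachP m n b c) : ReachP m n a c := by
  induction h2 with
  | refl => exact h1
  | step x y hr ha hi hc ih => exact ReachP.step x y ih ha hi hc

/-- every valid neighbour of `x` is in `res` -/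
def closedIn (m : List (List Int)) (n : Int) (res : List (Int × Int)) (x : Int × Int) : Prop :=
  ∀ y, adjM x y → inb n y → cellv m y.1 y.2 = 1 → y ∈ res

theorem length_setc (m : List (List Int)) (r c v : Int) :
    (setc m r c v).length = m.length := by
  simp [setc]

theorem mapLength_setc (m : List (List Int)) (r c v : Int) :
    (setc m r c v).map List.length = m.map List.length := by
  unfold setc
  by_cases h : r.toNat < m.length
  · rw [List.map_set]
    have h2 : r.toNat < (m.map List.length).length := by simpa using h
    have hv : ((m.getD r.toNat []).set c.toNat v).length = (m.map List.length)[r.toNat] := by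
      rw [List.length_set, List.getD_eq_getElem _ _ h, List.getElem_map]
    rw [hv, List.set_getElem_self h2]
  · rw [List.set_eq_of_length_le (by omega)]

theorem getD_mapLength (m : List (List Int)) (i : Nat) :
    ((m.getD i []).length) = (m.map List.length).getD i 0 := by
  by_cases h : i < m.length
  · simp [List.getD, List.getElem?_eq_getElem, h]
  · rw [List.getD_eq_default _ _ (by omega), List.getD_eq_default _ _ (by simpa using by omega)]
    simp

theorem GridOK_of_mapLength (n : Int) (a b : List (List Int))
    (h : a.map List.length = b.map List.length) (hb : GridOK n b) : GridOK n a := by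
  obtain ⟨h1, h2⟩ := hb
  have hlen : a.length = b.length := by
    have := congrArg List.length h; simpa using this
  refine ⟨by omega, fun i hi => ?_⟩
  have := h2 i hi
  rw [getD_mapLength, h, ← getD_mapLength]
  omega

theorem cellv_setc_eq (m : List (List Int)) (r c v : Int)
    (hr : r.toNat < m.length) (hc : c.toNat < (m.getD r.toNat []).length) :
    cellv (setc m r c v) r c = v := by
  unfold cellv setc
  rw [List.getD_eq_getElem?_getD] at hc
  simp only [List.getD_eq_getElem?_getD]
  rw [List.getElem?_set_self hr]
  simp only [Option.getD_some]
  rw [List.getElem?_set_self hc]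
  simp

theorem cellv_setc_ne (m : List (List Int)) (r c v r' c' : Int)
    (h : r.toNat ≠ r'.toNat ∨ c.toNat ≠ c'.toNat) :
    cellv (setc m r c v) r' c' = cellv m r' c' := by
  unfold cellv setc
  simp only [List.getD_eq_getElem?_getD]
  rcases h with h | h
  · rw [List.getElem?_set_ne h]
  · by_cases hr : r.toNat = r'.toNat
    · rw [hr]
      by_cases hlt : r'.toNat < m.length
      · rw [List.getElem?_set_self hlt]
        simp only [Option.getD_some]
        rw [List.getElem?_set_ne h]
      · have e1 : (m.set r'.toNat ((m[r'.toNat]?.getD []).set c.toNat v))[r'.toNat]? = (none : Option (List Int)) :=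
          List.getElem?_eq_none (by rw [List.length_set]; omega)
        have e2 : m[r'.toNat]? = (none : Option (List Int)) := List.getElem?_eq_none (by omega)
        rw [e1, e2]
    · rw [List.getElem?_set_ne hr]

theorem foldl_min_spec (l : List Int) (a : Int) :
    (l.foldl min a ≤ a ∧ ∀ y ∈ l, l.foldl min a ≤ y) ∧ (l.foldl min a = a ∨ l.foldl min a ∈ l) := by
  induction l generalizing a with
  | nil => simp
  | cons b t ih =>
    obtain ⟨⟨h1, h2⟩, h3⟩ := ih (min a b)
    have hml := min_le_left a b
    have hmr := min_le_right a b
    simp only [List.foldl_cons]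
    refine ⟨⟨by omega, ?_⟩, ?_⟩
    · intro y hy
      rcases List.mem_cons.1 hy with rfl | hy
      · omega
      · exact h2 y hy
    · rcases h3 with h3 | h3
      · rcases min_choice a b with hm | hm
        · left; rw [h3, hm]
        · right; rw [h3, hm]; exact List.mem_cons_self
      · right; exact List.mem_cons_of_mem _ h3

theorem foldl_max_spec (l : List Int) (a : Int) :
    (a ≤ l.foldl max a ∧ ∀ y ∈ l, y ≤ l.foldl max a) ∧ (l.foldl max a = a ∨ l.foldl max a ∈ l) := by
  induction l generalizing a with
  | nil => simp
  | cons b t ih =>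
    obtain ⟨⟨h1, h2⟩, h3⟩ := ih (max a b)
    have hml := le_max_left a b
    have hmr := le_max_right a b
    simp only [List.foldl_cons]
    refine ⟨⟨by omega, ?_⟩, ?_⟩
    · intro y hy
      rcases List.mem_cons.1 hy with rfl | hy
      · omega
      · exact h2 y hy
    · rcases h3 with h3 | h3
      · rcases max_choice a b with hm | hm
        · left; rw [h3, hm]
        · right; rw [h3, hm]; exact List.mem_cons_self
      · right; exact List.mem_cons_of_mem _ h3

theorem pyMinL_spec (xs : List Int) (hxs : xs ≠ []) :
    pyMinL xs ∈ xs ∧ ∀ y ∈ xs, pyMinL xs ≤ y := by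
  cases xs with
  | nil => exact absurd rfl hxs
  | cons a t =>
    obtain ⟨⟨h1, h2⟩, h3⟩ := foldl_min_spec t a
    refine ⟨?_, ?_⟩
    · rcases h3 with h3 | h3
      · simp [pyMinL, h3]
      · exact List.mem_cons_of_mem _ (by simpa [pyMinL] using h3)
    · intro y hy
      rcases List.mem_cons.1 hy with rfl | hy
      · simpa [pyMinL] using h1
      · simpa [pyMinL] using h2 y hy

theorem pyMaxL_spec (xs : List Int) (hxs : xs ≠ []) :
    pyMaxL xs ∈ xs ∧ ∀ y ∈ xs, y ≤ pyMaxL xs := by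
  cases xs with
  | nil => exact absurd rfl hxs
  | cons a t =>
    obtain ⟨⟨h1, h2⟩, h3⟩ := foldl_max_spec t a
    refine ⟨?_, ?_⟩
    · rcases h3 with h3 | h3
      · simp [pyMaxL, h3]
      · exact List.mem_cons_of_mem _ (by simpa [pyMaxL] using h3)
    · intro y hy
      rcases List.mem_cons.1 hy with rfl | hy
      · simpa [pyMaxL] using h1
      · simpa [pyMaxL] using h2 y hy

theorem pyMinL_congr (xs ys : List Int) (hx : xs ≠ []) (hy : ys ≠ [])
    (h : ∀ a, a ∈ xs ↔ a ∈ ys) : pyMinL xs = pyMinL ys := by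
  obtain ⟨hm1, hl1⟩ := pyMinL_spec xs hx
  obtain ⟨hm2, hl2⟩ := pyMinL_spec ys hy
  have h1 := hl1 _ ((h _).2 hm2)
  have h2 := hl2 _ ((h _).1 hm1)
  omega

theorem pyMaxL_congr (xs ys : List Int) (hx : xs ≠ []) (hy : ys ≠ [])
    (h : ∀ a, a ∈ xs ↔ a ∈ ys) : pyMaxL xs = pyMaxL ys := by
  obtain ⟨hm1, hl1⟩ := pyMaxL_spec xs hx
  obtain ⟨hm2, hl2⟩ := pyMaxL_spec ys hy
  have h1 := hl1 _ ((h _).2 hm2)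
  have h2 := hl2 _ ((h _).1 hm1)
  omega

theorem nodup_inb_length_le (n : Int) (l : List (Int × Int))
    (hnd : l.Nodup) (hin : ∀ x ∈ l, inb n x) : l.length ≤ n.toNat * n.toNat := by
  classical
  set f : Int × Int → Nat := fun x => x.1.toNat * n.toNat + x.2.toNat with hf
  have hmap : (l.map f).Nodup := by
    refine List.Nodup.map_on ?_ hnd
    intro x hx y hy hxy
    obtain ⟨hx1, hx2, hx3, hx4⟩ := hin x hx
    obtain ⟨hy1, hy2, hy3, hy4⟩ := hin y hy
    have hx2' : x.1.toNat < n.toNat := by omega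
    have hx4' : x.2.toNat < n.toNat := by omega
    have hy2' : y.1.toNat < n.toNat := by omega
    have hy4' : y.2.toNat < n.toNat := by omega
    have hN : 0 < n.toNat := by omega
    simp only [hf] at hxy
    have e1 : x.1.toNat = y.1.toNat := by
      have := Nat.div_add_mod (x.1.toNat * n.toNat + x.2.toNat) n.toNat
      have d1 : (x.1.toNat * n.toNat + x.2.toNat) / n.toNat = x.1.toNat := by
        rw [Nat.mul_comm, Nat.mul_add_div hN, Nat.div_eq_of_lt hx4']; omega
      have d2 : (y.1.toNat * n.toNat + y.2.toNat) / n.toNat = y.1.toNat := by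
        rw [Nat.mul_comm, Nat.mul_add_div hN, Nat.div_eq_of_lt hy4']; omega
      rw [← d1, ← d2, hxy]
    have e2 : x.2.toNat = y.2.toNat := by
      have : x.1.toNat * n.toNat = y.1.toNat * n.toNat := by rw [e1]
      omega
    have : x.1 = y.1 := by omega
    have : x.2 = y.2 := by omega
    exact Prod.ext (by omega) (by omega)
  have hsub : (l.map f).toFinset ⊆ Finset.range (n.toNat * n.toNat) := by
    intro a ha
    simp only [List.mem_toFinset, List.mem_map] at ha
    obtain ⟨x, hx, rfl⟩ := ha
    obtain ⟨hx1, hx2, hx3, hx4⟩ := hin x hx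
    have hx2' : x.1.toNat < n.toNat := by omega
    have hx4' : x.2.toNat < n.toNat := by omega
    simp only [Finset.mem_range, hf]
    calc x.1.toNat * n.toNat + x.2.toNat < x.1.toNat * n.toNat + n.toNat := by omega
      _ = (x.1.toNat + 1) * n.toNat := by ring
      _ ≤ n.toNat * n.toNat := Nat.mul_le_mul_right _ (by omega)
  have := Finset.card_le_card hsub
  rw [Finset.card_range, List.toFinset_card_of_nodup hmap] at this
  simpa using this

theorem rowlen_setc (z : List (List Int)) (a b v : Int) (i : Nat) :
    (((setc z a b v).getD i []).length) = ((z.getD i []).length) := by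
  rw [getD_mapLength, getD_mapLength, mapLength_setc]

theorem getD_replicate_row (rows cols : Nat) (i : Nat) (hi : i < rows) :
    ((List.replicate rows (List.replicate cols (0 : Int))).getD i []) = List.replicate cols 0 := by
  rw [List.getD_eq_getElem _ _ (by simpa using hi), List.getElem_replicate]

theorem paintFold_mapLength (xs : List (Int × Int)) (z : List (List Int)) (dr dc v : Int) :
    ((xs.foldl (fun pz rc => setc pz (rc.1 - dr) (rc.2 - dc) v) z).map List.length) = z.map List.length := by
  induction xs generalizing z with
  | nil => rfl
  | cons x t ih => rw [List.foldl_cons, ih, mapLength_setc]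

theorem cellv_paintFold (xs : List (Int × Int)) (z : List (List Int)) (dr dc v : Int)
    (hin : ∀ x ∈ xs, 0 ≤ x.1 - dr ∧ (x.1 - dr).toNat < z.length ∧ 0 ≤ x.2 - dc ∧
      (x.2 - dc).toNat < ((z.getD (x.1 - dr).toNat []).length)) :
    ∀ r c : Int, 0 ≤ r → 0 ≤ c →
      cellv (xs.foldl (fun pz rc => setc pz (rc.1 - dr) (rc.2 - dc) v) z) r c =
        if (r + dr, c + dc) ∈ xs then v else cellv z r c := by
  induction xs generalizing z with
  | nil => intro r c _ _; simp
  | cons x t ih =>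
    intro r c hr hc
    rw [List.foldl_cons]
    have hin' : ∀ y ∈ t, 0 ≤ y.1 - dr ∧ (y.1 - dr).toNat < (setc z (x.1 - dr) (x.2 - dc) v).length ∧
        0 ≤ y.2 - dc ∧ (y.2 - dc).toNat < (((setc z (x.1 - dr) (x.2 - dc) v).getD (y.1 - dr).toNat []).length) := by
      intro y hy
      obtain ⟨a1, a2, a3, a4⟩ := hin y (List.mem_cons_of_mem _ hy)
      exact ⟨a1, by rw [length_setc]; exact a2, a3, by rw [rowlen_setc]; exact a4⟩
    rw [ih _ hin' r c hr hc]
    obtain ⟨b1, b2, b3, b4⟩ := hin x List.mem_cons_self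
    by_cases hm : (r + dr, c + dc) ∈ t
    · simp [hm]
    · by_cases hx : (r + dr, c + dc) = x
      · have hr1 : r = x.1 - dr := by
          have := congrArg Prod.fst hx; simp at this; omega
        have hc1 : c = x.2 - dc := by
          have := congrArg Prod.snd hx; simp at this; omega
        rw [if_neg hm, if_pos (by simp [hx]), hr1, hc1]
        exact cellv_setc_eq z (x.1 - dr) (x.2 - dc) v b2 b4
      · have hne : (x.1 - dr).toNat ≠ r.toNat ∨ (x.2 - dc).toNat ≠ c.toNat := by
          by_contra hcon
          rw [not_or] at hcon
          simp only [not_not] at hcon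
          apply hx
          have e1 : x.1 - dr = r := by omega
          have e2 : x.2 - dc = c := by omega
          exact Prod.ext (by omega) (by omega)
        rw [if_neg hm, if_neg (by simp [hx, hm]), cellv_setc_ne _ _ _ _ _ _ hne]

theorem zeroFold_mapLength (xs : List (Int × Int)) (m : List (List Int)) :
    ((xs.foldl (fun g rc => setc g rc.1 rc.2 0) m).map List.length) = m.map List.length := by
  induction xs generalizing m with
  | nil => rfl
  | cons x t ih => rw [List.foldl_cons, ih, mapLength_setc]

theorem cellv_zeroFold (xs : List (Int × Int)) (m : List (List Int))
    (hin : ∀ x ∈ xs, 0 ≤ x.1 ∧ x.1.toNat < m.length ∧ 0 ≤ x.2 ∧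
      x.2.toNat < ((m.getD x.1.toNat []).length)) :
    ∀ r c : Int, 0 ≤ r → 0 ≤ c →
      cellv (xs.foldl (fun g rc => setc g rc.1 rc.2 0) m) r c =
        if (r, c) ∈ xs then 0 else cellv m r c := by
  induction xs generalizing m with
  | nil => intro r c _ _; simp
  | cons x t ih =>
    intro r c hr hc
    rw [List.foldl_cons]
    have hin' : ∀ y ∈ t, 0 ≤ y.1 ∧ y.1.toNat < (setc m x.1 x.2 0).length ∧ 0 ≤ y.2 ∧
        y.2.toNat < (((setc m x.1 x.2 0).getD y.1.toNat []).length) := by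
      intro y hy
      obtain ⟨a1, a2, a3, a4⟩ := hin y (List.mem_cons_of_mem _ hy)
      exact ⟨a1, by rw [length_setc]; exact a2, a3, by rw [rowlen_setc]; exact a4⟩
    rw [ih _ hin' r c hr hc]
    obtain ⟨b1, b2, b3, b4⟩ := hin x List.mem_cons_self
    by_cases hm : (r, c) ∈ t
    · simp [hm]
    · by_cases hx : (r, c) = x
      · rw [if_neg hm, if_pos (by simp [hx])]
        have hr1 : r = x.1 := by have := congrArg Prod.fst hx; simpa using this
        have hc1 : c = x.2 := by have := congrArg Prod.snd hx; simpa using this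
        rw [hr1, hc1]
        exact cellv_setc_eq m x.1 x.2 0 b2 b4
      · have hne : x.1.toNat ≠ r.toNat ∨ x.2.toNat ≠ c.toNat := by
          by_contra hcon
          rw [not_or] at hcon
          simp only [not_not] at hcon
          exact hx (Prod.ext (by omega) (by omega))
        rw [if_neg hm, if_neg (by simp [hx, hm]), cellv_setc_ne _ _ _ _ _ _ hne]

theorem matEq (a b : List (List Int)) (hsh : a.map List.length = b.map List.length)
    (h : ∀ r c : Nat, cellv a (r : Int) (c : Int) = cellv b (r : Int) (c : Int)) : a = b := by
  have hlen : a.length = b.length := by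
    have := congrArg List.length hsh; simpa using this
  apply List.ext_getElem hlen
  intro i h1 h2
  have hrow : a[i].length = b[i].length := by
    have e1 : a[i].length = (a.map List.length).getD i 0 := by
      rw [← getD_mapLength, List.getD_eq_getElem _ _ h1]
    have e2 : b[i].length = (b.map List.length).getD i 0 := by
      rw [← getD_mapLength, List.getD_eq_getElem _ _ h2]
    rw [e1, e2, hsh]
  apply List.ext_getElem hrow
  intro j j1 j2
  have := h i j
  unfold cellv at this
  rw [Int.toNat_natCast, Int.toNat_natCast, List.getD_eq_getElem _ _ h1,
      List.getD_eq_getElem _ _ h2, List.getD_eq_getElem _ _ j1, List.getD_eq_getElem _ _ j2] at this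
  exact this

theorem moves_adj (x : Int × Int) (mv : Int × Int) (h : mv ∈ movesL) :
    adjM x (x.1 + mv.1, x.2 + mv.2) := by
  simp only [movesL, List.mem_cons, List.not_mem_nil, or_false] at h
  rcases h with rfl | rfl | rfl | rfl
  · left; exact Prod.ext (by simp; ring) (by simp)
  · right; left; exact Prod.ext (by simp) (by simp)
  · right; right; left; exact Prod.ext (by simp) (by simp)
  · right; right; right; exact Prod.ext (by simp) (by simp; ring)

theorem adj_to_move (x y : Int × Int) (h : adjM x y) :
    ∃ mv ∈ movesL, y = (x.1 + mv.1, x.2 + mv.2) := by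
  rcases h with rfl | rfl | rfl | rfl
  · exact ⟨(-1, 0), by simp [movesL], Prod.ext (by simp; ring) (by simp)⟩
  · exact ⟨(1, 0), by simp [movesL], Prod.ext (by simp) (by simp)⟩
  · exact ⟨(0, 1), by simp [movesL], Prod.ext (by simp) (by simp)⟩
  · exact ⟨(0, -1), by simp [movesL], Prod.ext (by simp) (by simp; ring)⟩

theorem reach_subset_closed (m : List (List Int)) (n : Int) (s : Int × Int)
    (res : List (Int × Int)) (hs : s ∈ res)
    (hcl : ∀ p ∈ res, closedIn m n res p) :
    ∀ x, ReachP m n s x → x ∈ res := by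
  intro x hx
  induction hx with
  | refl => exact hs
  | step a b hr ha hi hc ih => exact hcl a ih b ha hi hc

theorem dfs_spec (fuel : Nat) :
    (∀ (m : List (List Int)) (n : Int) (cur : Int × Int) (routes : List (Int × Int)),
      inb n cur → cur ∉ routes → routes.Nodup → (∀ x ∈ routes, inb n x) →
      n.toNat * n.toNat + 1 ≤ fuel + routes.length →
      ((∀ x ∈ routes, x ∈ dfsA fuel m n cur routes) ∧
       routes.length ≤ (dfsA fuel m n cur routes).length ∧
       cur ∈ dfsA fuel m n cur routes ∧
       (dfsA fuel m n cur routes).Nodup ∧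
       (∀ x ∈ dfsA fuel m n cur routes, inb n x) ∧
       (∀ x ∈ dfsA fuel m n cur routes, x ∉ routes →
         closedIn m n (dfsA fuel m n cur routes) x) ∧
       (∀ x ∈ dfsA fuel m n cur routes, x ∈ routes ∨ ReachP m n cur x))) ∧
    (∀ (m : List (List Int)) (n : Int) (cur : Int × Int) (mvs : List (Int × Int))
      (routes : List (Int × Int)),
      inb n cur → cur ∈ routes → routes.Nodup → (∀ x ∈ routes, inb n x) →
      (∀ mv ∈ mvs, mv ∈ movesL) →
      n.toNat * n.toNat + 1 ≤ fuel + routes.length →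
      ((∀ x ∈ routes, x ∈ dfsAmoves fuel m n cur mvs routes) ∧
       routes.length ≤ (dfsAmoves fuel m n cur mvs routes).length ∧
       (dfsAmoves fuel m n cur mvs routes).Nodup ∧
       (∀ x ∈ dfsAmoves fuel m n cur mvs routes, inb n x) ∧
       (∀ mv ∈ mvs, inb n (cur.1 + mv.1, cur.2 + mv.2) →
         cellv m (cur.1 + mv.1) (cur.2 + mv.2) = 1 →
         (cur.1 + mv.1, cur.2 + mv.2) ∈ dfsAmoves fuel m n cur mvs routes) ∧
       (∀ x ∈ dfsAmoves fuel m n cur mvs routes, x ∉ routes →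
         closedIn m n (dfsAmoves fuel m n cur mvs routes) x) ∧
       (∀ x ∈ dfsAmoves fuel m n cur mvs routes, x ∈ routes ∨ ReachP m n cur x))) := by
  induction fuel with
  | zero =>
    constructor
    · intro m n cur routes h1 h2 h3 h4 h5
      exfalso
      have hb := nodup_inb_length_le n (cur :: routes) (List.nodup_cons.2 ⟨h2, h3⟩)
        (by intro x hx
            rcases List.mem_cons.1 hx with rfl | hx
            · exact h1
            · exact h4 x hx)
      simp only [List.length_cons] at hb
      omega
    · intro m n cur mvs routes h1 h2 h3 h4 hmv h5
      exfalso
      have hb := nodup_inb_length_le n routes h3 h4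
      omega
  | succ fuel ih =>
    obtain ⟨ihd, ihm⟩ := ih
    have hd : ∀ (m : List (List Int)) (n : Int) (cur : Int × Int) (routes : List (Int × Int)),
        inb n cur → cur ∉ routes → routes.Nodup → (∀ x ∈ routes, inb n x) →
        n.toNat * n.toNat + 1 ≤ (fuel + 1) + routes.length →
        ((∀ x ∈ routes, x ∈ dfsA (fuel + 1) m n cur routes) ∧
         routes.length ≤ (dfsA (fuel + 1) m n cur routes).length ∧
         cur ∈ dfsA (fuel + 1) m n cur routes ∧
         (dfsA (fuel + 1) m n cur routes).Nodup ∧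
         (∀ x ∈ dfsA (fuel + 1) m n cur routes, inb n x) ∧
         (∀ x ∈ dfsA (fuel + 1) m n cur routes, x ∉ routes →
           closedIn m n (dfsA (fuel + 1) m n cur routes) x) ∧
         (∀ x ∈ dfsA (fuel + 1) m n cur routes, x ∈ routes ∨ ReachP m n cur x)) := by
      intro m n cur routes h1 h2 h3 h4 h5
      have hres : dfsA (fuel + 1) m n cur routes =
          dfsAmoves fuel m n cur movesL (routes ++ [cur]) := by
        rw [dfsA]
      have h3' : (routes ++ [cur]).Nodup := by
        rw [List.nodup_append]
        exact ⟨h3, List.nodup_singleton _, by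
          intro a ha b hb
          simp only [List.mem_singleton] at hb
          subst hb
          intro hab
          subst hab
          exact h2 ha⟩
      have h4' : ∀ x ∈ routes ++ [cur], inb n x := by
        intro x hx
        rcases List.mem_append.1 hx with hx | hx
        · exact h4 x hx
        · simp only [List.mem_singleton] at hx; subst hx; exact h1
      have h5' : n.toNat * n.toNat + 1 ≤ fuel + (routes ++ [cur]).length := by
        simp only [List.length_append, List.length_singleton]; omega
      obtain ⟨m1, m2, m3, m4, m5, m6, m7⟩ :=
        ihm m n cur movesL (routes ++ [cur]) h1 (by simp) h3' h4' (fun mv h => h) h5'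
      rw [hres]
      refine ⟨fun x hx => m1 x (by simp [hx]), ?_, m1 cur (by simp), m3, m4, ?_, ?_⟩
      · simp only [List.length_append, List.length_singleton] at m2; omega
      · intro x hx hnx
        by_cases hxc : x = cur
        · subst hxc
          intro y hady hiy hcy
          obtain ⟨mv, hmv, rfl⟩ := adj_to_move _ _ hady
          exact m5 mv hmv hiy hcy
        · exact m6 x hx (by
            simp only [List.mem_append, List.mem_singleton]
            rintro (h | h)
            · exact hnx h
            · exact hxc h)
      · intro x hx
        rcases m7 x hx with hin | hre
        · rcases List.mem_append.1 hin with h | h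
          · exact Or.inl h
          · simp only [List.mem_singleton] at h; subst h; exact Or.inr ReachP.refl
        · exact Or.inr hre
    refine ⟨hd, ?_⟩
    intro m n cur mvs
    induction mvs with
    | nil =>
      intro routes h1 h2 h3 h4 hmv h5
      rw [show dfsAmoves (fuel + 1) m n cur [] routes = routes from by rw [dfsAmoves]]
      exact ⟨fun x hx => hx, le_refl _, h3, h4, by simp, fun x hx hnx => absurd hx hnx,
        fun x hx => Or.inl hx⟩
    | cons mv rest ihrest =>
      intro routes h1 h2 h3 h4 hmv h5
      have hres : dfsAmoves (fuel + 1) m n cur (mv :: rest) routes =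
          dfsAmoves (fuel + 1) m n cur rest
            (if 0 ≤ cur.1 + mv.1 ∧ cur.1 + mv.1 < n ∧ 0 ≤ cur.2 + mv.2 ∧ cur.2 + mv.2 < n then
              if cellv m (cur.1 + mv.1) (cur.2 + mv.2) = 1 ∧ (cur.1 + mv.1, cur.2 + mv.2) ∉ routes
              then dfsA (fuel + 1) m n (cur.1 + mv.1, cur.2 + mv.2) routes
              else routes
            else routes) := by
        rw [dfsAmoves]
      by_cases g1 : 0 ≤ cur.1 + mv.1 ∧ cur.1 + mv.1 < n ∧ 0 ≤ cur.2 + mv.2 ∧ cur.2 + mv.2 < n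
      · by_cases g2 : cellv m (cur.1 + mv.1) (cur.2 + mv.2) = 1 ∧
            (cur.1 + mv.1, cur.2 + mv.2) ∉ routes
        · rw [if_pos g2, if_pos g1] at hres
          have hnbr : inb n (cur.1 + mv.1, cur.2 + mv.2) := g1
          obtain ⟨d1, d2, d3, d4, d5, d6, d7⟩ :=
            hd m n (cur.1 + mv.1, cur.2 + mv.2) routes hnbr g2.2 h3 h4 h5
          obtain ⟨r1, r2, r3, r4, r5, r6, r7⟩ :=
            ihrest (dfsA (fuel + 1) m n (cur.1 + mv.1, cur.2 + mv.2) routes) h1 (d1 cur h2) d4 d5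
              (fun mv' h => hmv mv' (List.mem_cons_of_mem _ h)) (by omega)
          rw [hres]
          have hreach_nbr : ReachP m n cur (cur.1 + mv.1, cur.2 + mv.2) :=
            ReachP.step cur _ ReachP.refl (moves_adj cur mv (hmv mv List.mem_cons_self)) hnbr g2.1
          refine ⟨fun x hx => r1 _ (d1 x hx), by omega, r3, r4, ?_, ?_, ?_⟩
          · intro mv' hmv' hib hcv
            rcases List.mem_cons.1 hmv' with rfl | hmv'
            · exact r1 _ d3
            · exact r5 mv' hmv' hib hcv
          · intro x hx hnx
            by_cases hxs : x ∈ dfsA (fuel + 1) m n (cur.1 + mv.1, cur.2 + mv.2) routes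
            · intro y hady hiy hcy
              exact r1 _ (d6 x hxs hnx y hady hiy hcy)
            · exact r6 x hx hxs
          · intro x hx
            rcases r7 x hx with hin | hre
            · rcases d7 x hin with hin2 | hre2
              · exact Or.inl hin2
              · exact Or.inr (ReachP_trans m n cur _ x hreach_nbr hre2)
            · exact Or.inr hre
        · rw [if_neg g2, if_pos g1] at hres
          obtain ⟨r1, r2, r3, r4, r5, r6, r7⟩ :=
            ihrest routes h1 h2 h3 h4 (fun mv' h => hmv mv' (List.mem_cons_of_mem _ h)) h5
          rw [hres]
          refine ⟨r1, r2, r3, r4, ?_, r6, r7⟩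
          intro mv' hmv' hib hcv
          rcases List.mem_cons.1 hmv' with rfl | hmv'
          · have hmem : (cur.1 + mv'.1, cur.2 + mv'.2) ∈ routes := by
              by_contra hno
              exact g2 ⟨hcv, hno⟩
            exact r1 _ hmem
          · exact r5 mv' hmv' hib hcv
      · rw [if_neg g1] at hres
        obtain ⟨r1, r2, r3, r4, r5, r6, r7⟩ :=
          ihrest routes h1 h2 h3 h4 (fun mv' h => hmv mv' (List.mem_cons_of_mem _ h)) h5
        rw [hres]
        refine ⟨r1, r2, r3, r4, ?_, r6, r7⟩
        intro mv' hmv' hib hcv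
        rcases List.mem_cons.1 hmv' with rfl | hmv'
        · exact absurd hib g1
        · exact r5 mv' hmv' hib hcv

theorem flood_spec (fuel : Nat) (m : List (List Int)) (n : Int) (seed : Int × Int) :
    ∀ (grid : List (List Int)) (stack cells : List (Int × Int)),
      GridOK n m → inb n seed → cellv m seed.1 seed.2 = 1 →
      (∀ r c : Int, 0 ≤ r → 0 ≤ c →
        cellv grid r c = if (r, c) ∈ cells then 0 else cellv m r c) →
      grid.map List.length = m.map List.length →
      cells.Nodup →
      (∀ x ∈ cells, inb n x ∧ cellv m x.1 x.2 = 1 ∧ ReachP m n seed x) →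
      (seed ∈ cells ∨ seed ∈ stack) →
      (∀ x ∈ stack, x = seed ∨ ∃ p ∈ cells, adjM p x) →
      (∀ p ∈ cells, ∀ y, adjM p y → inb n y → cellv m y.1 y.2 = 1 →
        y ∈ cells ∨ y ∈ stack) →
      stack.length + 4 * (n.toNat * n.toNat - cells.length) < fuel →
      ((∀ x ∈ cells, x ∈ (floodB fuel grid n stack cells).1) ∧
       (floodB fuel grid n stack cells).1.Nodup ∧
       (∀ x ∈ (floodB fuel grid n stack cells).1,
         inb n x ∧ cellv m x.1 x.2 = 1 ∧ ReachP m n seed x) ∧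
       seed ∈ (floodB fuel grid n stack cells).1 ∧
       (∀ p ∈ (floodB fuel grid n stack cells).1, ∀ y, adjM p y → inb n y →
         cellv m y.1 y.2 = 1 → y ∈ (floodB fuel grid n stack cells).1) ∧
       (∀ r c : Int, 0 ≤ r → 0 ≤ c →
         cellv (floodB fuel grid n stack cells).2 r c =
           if (r, c) ∈ (floodB fuel grid n stack cells).1 then 0 else cellv m r c) ∧
       (floodB fuel grid n stack cells).2.map List.length = m.map List.length) := by
  induction fuel with
  | zero =>
    intro grid stack cells _ _ _ _ _ _ _ _ _ _ hfuel
    exact absurd hfuel (by omega)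
  | succ fuel ih =>
    intro grid stack cells hok hseed hseedc hgrid hshape hnd hcells hseedin hstack hclosed hfuel
    have hmlen : grid.length = m.length := by
      have := congrArg List.length hshape; simpa using this
    cases hlast : stack.getLast? with
    | none =>
      have hnil : stack = [] := List.getLast?_eq_none_iff.mp hlast
      subst hnil
      have hres : floodB (fuel + 1) grid n [] cells = (cells, grid) := rfl
      rw [hres]
      refine ⟨fun x hx => hx, hnd, hcells, ?_, ?_, hgrid, hshape⟩
      · rcases hseedin with h | h
        · exact h
        · simp at h
      · intro p hp y hady hiy hcy
        rcases hclosed p hp y hady hiy hcy with h | h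
        · exact h
        · simp at h
    | some rc =>
      have hrcmem : rc ∈ stack := List.mem_of_getLast? hlast
      have hsplit : stack.dropLast ++ [rc] = stack := List.dropLast_append_getLast? rc hlast
      have hslen : stack.dropLast.length + 1 = stack.length := by
        conv_rhs => rw [← hsplit]
        simp
      have hres : floodB (fuel + 1) grid n stack cells =
          (if 0 ≤ rc.1 ∧ rc.1 < n ∧ 0 ≤ rc.2 ∧ rc.2 < n ∧ cellv grid rc.1 rc.2 = 1 then
            floodB fuel (setc grid rc.1 rc.2 0) n
              (stack.dropLast ++ [(rc.1 - 1, rc.2), (rc.1 + 1, rc.2), (rc.1, rc.2 + 1), (rc.1, rc.2 - 1)])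
              (cells ++ [rc])
          else floodB fuel grid n stack.dropLast cells) := by
        rw [floodB, hlast]
      by_cases g : 0 ≤ rc.1 ∧ rc.1 < n ∧ 0 ≤ rc.2 ∧ rc.2 < n ∧ cellv grid rc.1 rc.2 = 1
      · rw [if_pos g] at hres
        obtain ⟨g1, g2, g3, g4, g5⟩ := g
        have hinb_rc : inb n rc := ⟨g1, g2, g3, g4⟩
        have hgrc := hgrid rc.1 rc.2 g1 g3
        rw [g5] at hgrc
        have hrc_not : rc ∉ cells ∧ cellv m rc.1 rc.2 = 1 := by
          by_cases hin : (rc.1, rc.2) ∈ cells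
          · rw [if_pos hin] at hgrc
            exact absurd hgrc (by norm_num)
          · rw [if_neg hin] at hgrc
            exact ⟨hin, hgrc.symm⟩
        have hreach_rc : ReachP m n seed rc := by
          rcases hstack rc hrcmem with rfl | ⟨p, hp, hadj⟩
          · exact ReachP.refl
          · exact ReachP.step p rc (hcells p hp).2.2 hadj hinb_rc hrc_not.2
        have hrlt : rc.1.toNat < grid.length := by
          have := hok.1; omega
        have hclt : rc.2.toNat < (grid.getD rc.1.toNat []).length := by
          rw [getD_mapLength, hshape, ← getD_mapLength]
          have := hok.2 rc.1.toNat (by omega)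
          omega
        have Hgrid : ∀ r c : Int, 0 ≤ r → 0 ≤ c →
            cellv (setc grid rc.1 rc.2 0) r c =
              if (r, c) ∈ cells ++ [rc] then 0 else cellv m r c := by
          intro r c hr hc
          by_cases hpair : (r, c) = rc
          · have hr1 : r = rc.1 := congrArg Prod.fst hpair
            have hc1 : c = rc.2 := congrArg Prod.snd hpair
            subst hr1; subst hc1
            rw [if_pos (List.mem_append_right _ (by simp))]
            exact cellv_setc_eq grid rc.1 rc.2 0 hrlt hclt
          · have hne : rc.1.toNat ≠ r.toNat ∨ rc.2.toNat ≠ c.toNat := by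
              by_contra hcon
              rw [not_or] at hcon
              simp only [not_not] at hcon
              exact hpair (Prod.ext (by omega) (by omega))
            rw [cellv_setc_ne _ _ _ _ _ _ hne, hgrid r c hr hc]
            by_cases hm2 : (r, c) ∈ cells
            · rw [if_pos hm2, if_pos (List.mem_append_left _ hm2)]
            · rw [if_neg hm2, if_neg (by
                intro hcon
                rcases List.mem_append.1 hcon with h | h
                · exact hm2 h
                · simp only [List.mem_singleton] at h; exact hpair h)]
        have Hshape : (setc grid rc.1 rc.2 0).map List.length = m.map List.length := by
          rw [mapLength_setc, hshape]
        have Hnodup : (cells ++ [rc]).Nodup := by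
          simp only [List.nodup_append, hnd, List.nodup_singleton, true_and]
          intro a ha b hb
          simp only [List.mem_singleton] at hb
          subst hb
          intro hab
          subst hab
          exact hrc_not.1 ha
        have Hcells : ∀ x ∈ cells ++ [rc], inb n x ∧ cellv m x.1 x.2 = 1 ∧ ReachP m n seed x := by
          intro x hx
          rcases List.mem_append.1 hx with hx | hx
          · exact hcells x hx
          · simp only [List.mem_singleton] at hx
            subst hx
            exact ⟨hinb_rc, hrc_not.2, hreach_rc⟩
        have Hseedin : seed ∈ cells ++ [rc] ∨
            seed ∈ stack.dropLast ++
              [(rc.1 - 1, rc.2), (rc.1 + 1, rc.2), (rc.1, rc.2 + 1), (rc.1, rc.2 - 1)] := by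
          rcases hseedin with h | h
          · exact Or.inl (List.mem_append_left _ h)
          · rw [← hsplit] at h
            rcases List.mem_append.1 h with h | h
            · exact Or.inr (List.mem_append_left _ h)
            · simp only [List.mem_singleton] at h
              subst h
              exact Or.inl (List.mem_append_right _ (by simp))
        have Hstack : ∀ x ∈ stack.dropLast ++
              [(rc.1 - 1, rc.2), (rc.1 + 1, rc.2), (rc.1, rc.2 + 1), (rc.1, rc.2 - 1)],
            x = seed ∨ ∃ p ∈ cells ++ [rc], adjM p x := by
          intro x hx
          rcases List.mem_append.1 hx with hx | hx
          · rcases hstack x (by rw [← hsplit]; exact List.mem_append_left _ hx) with h | ⟨p, hp, hadj⟩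
            · exact Or.inl h
            · exact Or.inr ⟨p, List.mem_append_left _ hp, hadj⟩
          · refine Or.inr ⟨rc, List.mem_append_right _ (by simp), ?_⟩
            simp only [List.mem_cons, List.not_mem_nil, or_false] at hx
            rcases hx with rfl | rfl | rfl | rfl
            · exact Or.inl rfl
            · exact Or.inr (Or.inl rfl)
            · exact Or.inr (Or.inr (Or.inl rfl))
            · exact Or.inr (Or.inr (Or.inr rfl))
        have Hclosed : ∀ p ∈ cells ++ [rc], ∀ y, adjM p y → inb n y → cellv m y.1 y.2 = 1 →
            y ∈ cells ++ [rc] ∨ y ∈ stack.dropLast ++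
              [(rc.1 - 1, rc.2), (rc.1 + 1, rc.2), (rc.1, rc.2 + 1), (rc.1, rc.2 - 1)] := by
          intro p hp y hady hiy hcy
          rcases List.mem_append.1 hp with hp | hp
          · rcases hclosed p hp y hady hiy hcy with h | h
            · exact Or.inl (List.mem_append_left _ h)
            · rw [← hsplit] at h
              rcases List.mem_append.1 h with h | h
              · exact Or.inr (List.mem_append_left _ h)
              · simp only [List.mem_singleton] at h
                subst h
                exact Or.inl (List.mem_append_right _ (by simp))
          · simp only [List.mem_singleton] at hp
            subst hp
            refine Or.inr (List.mem_append_right _ ?_)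
            rcases hady with rfl | rfl | rfl | rfl <;> simp
        have Hfuel : (stack.dropLast ++
              [(rc.1 - 1, rc.2), (rc.1 + 1, rc.2), (rc.1, rc.2 + 1), (rc.1, rc.2 - 1)]).length +
            4 * (n.toNat * n.toNat - (cells ++ [rc]).length) < fuel := by
          have hb := nodup_inb_length_le n (cells ++ [rc]) Hnodup (fun x hx => (Hcells x hx).1)
          simp only [List.length_append, List.length_cons, List.length_nil,
            List.length_singleton] at hb hfuel ⊢
          omega
        obtain ⟨c1, c2, c3, c4, c5, c6, c7⟩ :=
          ih _ _ _ hok hseed hseedc Hgrid Hshape Hnodup Hcells Hseedin Hstack Hclosed Hfuel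
        rw [hres]
        exact ⟨fun x hx => c1 x (List.mem_append_left _ hx), c2, c3, c4, c5, c6, c7⟩
      · rw [if_neg g] at hres
        have hmemrc : inb n rc → cellv m rc.1 rc.2 = 1 → rc ∈ cells := by
          intro h1 hc1
          by_contra hno
          apply g
          refine ⟨h1.1, h1.2.1, h1.2.2.1, h1.2.2.2, ?_⟩
          rw [hgrid rc.1 rc.2 h1.1 h1.2.2.1, if_neg hno]
          exact hc1
        have Hseedin : seed ∈ cells ∨ seed ∈ stack.dropLast := by
          rcases hseedin with h | h
          · exact Or.inl h
          · rw [← hsplit] at h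
            rcases List.mem_append.1 h with h | h
            · exact Or.inr h
            · simp only [List.mem_singleton] at h
              subst h
              exact Or.inl (hmemrc hseed hseedc)
        have Hstack : ∀ x ∈ stack.dropLast, x = seed ∨ ∃ p ∈ cells, adjM p x := by
          intro x hx
          exact hstack x (by rw [← hsplit]; exact List.mem_append_left _ hx)
        have Hclosed : ∀ p ∈ cells, ∀ y, adjM p y → inb n y → cellv m y.1 y.2 = 1 →
            y ∈ cells ∨ y ∈ stack.dropLast := by
          intro p hp y hady hiy hcy
          rcases hclosed p hp y hady hiy hcy with h | h
          · exact Or.inl h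
          · rw [← hsplit] at h
            rcases List.mem_append.1 h with h | h
            · exact Or.inr h
            · simp only [List.mem_singleton] at h
              subst h
              exact Or.inl (hmemrc hiy hcy)
        have Hfuel : stack.dropLast.length + 4 * (n.toNat * n.toNat - cells.length) < fuel := by
          omega
        obtain ⟨c1, c2, c3, c4, c5, c6, c7⟩ :=
          ih _ _ _ hok hseed hseedc hgrid hshape hnd hcells Hseedin Hstack Hclosed Hfuel
        rw [hres]
        exact ⟨c1, c2, c3, c4, c5, c6, c7⟩

def countFold (bp : List String) : PySem.Dict String Int :=
  bp.foldl (fun d s => PySem.Dict.insert d s (PySem.Dict.getD d s 0 + 1)) PySem.Dict.empty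

theorem countFold_append (bp : List String) (k : String) :
    countFold (bp ++ [k]) =
      PySem.Dict.insert (countFold bp) k (PySem.Dict.getD (countFold bp) k 0 + 1) := by
  unfold countFold
  rw [List.foldl_append]
  rfl

theorem mapLength_fold {α : Type} (f : List (List Int) → α → List (List Int))
    (h : ∀ g x, (f g x).map List.length = g.map List.length) (l : List α)
    (g : List (List Int)) : ((l.foldl f g).map List.length) = g.map List.length := by
  induction l generalizing g with
  | nil => rfl
  | cons x t ih => rw [List.foldl_cons, ih, h]

theorem mapLength_invertN (n : Int) (g : List (List Int)) :
    (invertN n g).map List.length = g.map List.length := by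
  unfold invertN
  exact mapLength_fold _ (fun g i => mapLength_fold _ (fun g j => mapLength_setc _ _ _ _) _ g) _ g

theorem GridOK_of_pre_table (game_board table : List (List Int))
    (hpre : Pre_solution game_board table) : GridOK (table.length : Int) table := by
  obtain ⟨p1, p2, p3⟩ := hpre
  refine ⟨le_refl _, fun i hi => ?_⟩
  have hi' : i < table.length := by omega
  have hmem : table.getD i [] ∈ table := by
    rw [List.getD_eq_getElem _ _ hi']
    exact List.getElem_mem hi'
  have := p3 _ hmem
  omega

theorem GridOK_of_pre_board (game_board table : List (List Int))
    (hpre : Pre_solution game_board table) : GridOK (table.length : Int) game_board := by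
  obtain ⟨p1, p2, p3⟩ := hpre
  refine ⟨by omega, fun i hi => ?_⟩
  have hi' : i < game_board.length := by omega
  have hi2 : i < table.length := by omega
  have hmem : game_board.getD i [] ∈ game_board.take table.length := by
    rw [List.getD_eq_getElem _ _ hi']
    have hlen : i < (game_board.take table.length).length := by
      rw [List.length_take]; omega
    have : (game_board.take table.length)[i] = game_board[i] := List.getElem_take
    rw [← this]
    exact List.getElem_mem hlen
  have := p2 _ hmem
  omega

-- ----- shape keys: B's comprehension matrix vs A's painted matrix and zip(*) rotation -----

theorem getD_map_getD (p : List (List Int)) (j c : Nat) :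
    (p.map (fun rr => rr.getD j 0)).getD c 0 = (p.getD c []).getD j 0 := by
  by_cases h : c < p.length
  · rw [List.getD_eq_getElem _ _ (by simpa using h), List.getElem_map, List.getD_eq_getElem _ _ h]
  · have h1 : (p.map (fun rr => rr.getD j 0)).getD c 0 = 0 :=
      List.getD_eq_default _ _ (by simpa using Nat.le_of_not_lt h)
    have h2 : p.getD c [] = [] := List.getD_eq_default _ _ (by omega)
    rw [h1, h2]
    rfl

theorem getD_map_range_lt {α : Type} (f : Nat → α) (n i : Nat) (d : α) (h : i < n) :
    ((List.range n).map f).getD i d = f i := by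
  rw [List.getD_eq_getElem _ _ (by simpa using h)]
  simp

theorem getD_map_range_ge {α : Type} (f : Nat → α) (n i : Nat) (d : α) (h : n ≤ i) :
    ((List.range n).map f).getD i d = d :=
  List.getD_eq_default _ _ (by simpa using h)

theorem cellv_matOf (r0 r1 c0 c1 : Int) (S : List (Int × Int)) (r c : Nat) :
    cellv (matOf r0 r1 c0 c1 S) (r : Int) (c : Int) =
      if r < (r1 + 1 - r0).toNat ∧ c < (c1 + 1 - c0).toNat then
        (if (r0 + (r : Int), c0 + (c : Int)) ∈ S then 1 else 0) else 0 := by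
  unfold cellv matOf
  simp only [PySem.List.pyRange_one, List.map_map, Int.toNat_natCast]
  by_cases hr : r < (r1 + 1 - r0).toNat
  · rw [getD_map_range_lt _ _ _ _ hr]
    simp only [Function.comp_apply]
    by_cases hc : c < (c1 + 1 - c0).toNat
    · rw [getD_map_range_lt _ _ _ _ hc, if_pos ⟨hr, hc⟩]
      simp only [Function.comp_apply]
    · rw [getD_map_range_ge _ _ _ _ (Nat.le_of_not_lt hc), if_neg (by tauto)]
  · rw [getD_map_range_ge _ _ _ _ (Nat.le_of_not_lt hr), if_neg (by tauto)]
    rfl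

theorem mapLength_matOf (r0 r1 c0 c1 : Int) (S : List (Int × Int)) :
    (matOf r0 r1 c0 c1 S).map List.length =
      List.replicate (r1 + 1 - r0).toNat (c1 + 1 - c0).toNat := by
  unfold matOf
  rw [List.map_map]
  apply List.eq_replicate_iff.mpr
  constructor
  · simp [PySem.List.length_pyRange_one]
  · intro b hb
    obtain ⟨r, _, rfl⟩ := List.mem_map.1 hb
    simp [PySem.List.length_pyRange_one]

theorem getD_zero_headD (r : List Int) : r.getD 0 0 = r.headD 0 := by cases r <;> rfl

theorem zipStar_char : ∀ (C : Nat) (p : List (List Int)), p ≠ [] → (∀ r ∈ p, r.length = C) →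
    zipStar p = (List.range C).map (fun j => p.map (fun rr => rr.getD j 0)) := by
  intro C
  induction C with
  | zero =>
    intro p hp hall
    match p, hp with
    | x :: rest, _ =>
      have hx : x = [] := List.length_eq_zero_iff.mp (hall x (by simp))
      rw [zipStar]
      subst hx
      rw [dif_neg (by simp)]
      simp
  | succ C ih =>
    intro p hp hall
    match p, hp with
    | x :: rest, _ =>
      have hcond : x ≠ [] ∧ ∀ r ∈ rest, r ≠ [] := by
        constructor
        · exact List.ne_nil_of_length_pos (by rw [hall x (by simp)]; omega)
        · intro r hr
          exact List.ne_nil_of_length_pos (by rw [hall r (by simp [hr])]; omega)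
      rw [zipStar, dif_pos hcond]
      have htail : ∀ r ∈ (x :: rest).map List.tail, r.length = C := by
        intro r hr
        obtain ⟨s, hs, rfl⟩ := List.mem_map.1 hr
        rw [List.length_tail, hall s hs]
        omega
      rw [ih ((x :: rest).map List.tail) (by simp) htail]
      have hhead : (x :: rest).map (fun r => r.headD 0) =
          (x :: rest).map (fun rr => rr.getD 0 0) :=
        List.map_congr_left (fun rr _ => (getD_zero_headD rr).symm)
      have htl : (List.range C).map
            (fun j => ((x :: rest).map List.tail).map (fun rr => rr.getD j 0)) =
          (List.range C).map (fun j => (x :: rest).map (fun rr => rr.getD (j + 1) 0)) := by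
        apply List.map_congr_left
        intro j _
        rw [List.map_map]
        apply List.map_congr_left
        intro rr _
        cases rr <;> rfl
      rw [hhead, htl, List.range_succ_eq_map]
      rw [show List.map (fun j => List.map (fun rr => rr.getD j 0) (x :: rest))
            (0 :: List.map Nat.succ (List.range C)) =
          List.map (fun rr => rr.getD 0 0) (x :: rest) ::
            List.map ((fun j => List.map (fun rr => rr.getD j 0) (x :: rest)) ∘ Nat.succ)
              (List.range C) from by rw [List.map_cons, List.map_map]]
      rfl

theorem rot90_eq (p : List (List Int)) (C : Nat) (hp : p ≠ []) (hall : ∀ r ∈ p, r.length = C) :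
    rot90 p = ((List.range C).map (fun j => p.map (fun rr => rr.getD j 0))).reverse := by
  unfold rot90
  rw [zipStar_char C p hp hall]

theorem mapLength_rot90 (p : List (List Int)) (C : Nat) (hp : p ≠ [])
    (hall : ∀ r ∈ p, r.length = C) :
    (rot90 p).map List.length = List.replicate C p.length := by
  rw [rot90_eq p C hp hall]
  apply List.eq_replicate_iff.mpr
  constructor
  · simp
  · intro b hb
    rw [List.map_reverse, List.mem_reverse, List.map_map] at hb
    obtain ⟨j, _, rfl⟩ := List.mem_map.1 hb
    simp

theorem cellv_rot90 (p : List (List Int)) (C : Nat) (hp : p ≠ [])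
    (hall : ∀ r ∈ p, r.length = C) (r c : Nat) :
    cellv (rot90 p) (r : Int) (c : Int) =
      if r < C then cellv p (c : Int) ((C - 1 - r : Nat) : Int) else 0 := by
  rw [rot90_eq p C hp hall]
  unfold cellv
  simp only [Int.toNat_natCast]
  by_cases hr : r < C
  · have hrow : ((List.range C).map (fun j => p.map (fun rr => rr.getD j 0))).reverse.getD r []
        = p.map (fun rr => rr.getD (C - 1 - r) 0) := by
      rw [List.getD_eq_getElem _ _ (by simpa using hr), List.getElem_reverse]
      simp only [List.length_map, List.length_range, List.getElem_map, List.getElem_range]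
    rw [hrow, if_pos hr]
    exact getD_map_getD p (C - 1 - r) c
  · have hrow : ((List.range C).map (fun j => p.map (fun rr => rr.getD j 0))).reverse.getD r []
        = [] := List.getD_eq_default _ _ (by simpa using Nat.le_of_not_lt hr)
    rw [hrow, if_neg hr]
    rfl

theorem pyMinL_map_sub (k : Int) (l : List Int) (hl : l ≠ []) :
    pyMinL (l.map (fun x => k - x)) = k - pyMaxL l := by
  have hm : l.map (fun x => k - x) ≠ [] := by simpa using hl
  obtain ⟨h1, h2⟩ := pyMinL_spec _ hm
  obtain ⟨h3, h4⟩ := pyMaxL_spec l hl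
  obtain ⟨x0, hx0, hx0e⟩ := List.mem_map.1 h1
  have e1 := h2 (k - pyMaxL l) (List.mem_map_of_mem h3)
  have e2 := h4 x0 hx0
  omega

theorem pyMaxL_map_sub (k : Int) (l : List Int) (hl : l ≠ []) :
    pyMaxL (l.map (fun x => k - x)) = k - pyMinL l := by
  have hm : l.map (fun x => k - x) ≠ [] := by simpa using hl
  obtain ⟨h1, h2⟩ := pyMaxL_spec _ hm
  obtain ⟨h3, h4⟩ := pyMinL_spec l hl
  obtain ⟨x0, hx0, hx0e⟩ := List.mem_map.1 h1
  have e1 := h2 (k - pyMinL l) (List.mem_map_of_mem h3)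
  have e2 := h4 x0 hx0
  omega

theorem map_fst_rotCells (S : List (Int × Int)) :
    (rotCells S).map (·.1) = (S.map (·.2)).map (fun x => pyMaxL (S.map (·.2)) - x) := by
  unfold rotCells
  rw [List.map_map, List.map_map]
  rfl

theorem map_snd_rotCells (S : List (Int × Int)) :
    (rotCells S).map (·.2) = S.map (·.1) := by
  unfold rotCells
  rw [List.map_map]
  rfl

theorem rotCells_ne (S : List (Int × Int)) (h : S ≠ []) : rotCells S ≠ [] := by
  simpa [rotCells] using h

theorem mem_rotCells (S : List (Int × Int)) (z : Int × Int) :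
    z ∈ rotCells S ↔ (z.2, pyMaxL (S.map (·.2)) - z.1) ∈ S := by
  unfold rotCells
  constructor
  · intro h
    obtain ⟨p, hp, he⟩ := List.mem_map.1 h
    have e1 : pyMaxL (S.map (·.2)) - p.2 = z.1 := congrArg Prod.fst he
    have e2 : p.1 = z.2 := congrArg Prod.snd he
    have : (z.2, pyMaxL (S.map (·.2)) - z.1) = p := Prod.ext (by omega) (by omega)
    rw [this]
    exact hp
  · intro h
    have h2 := List.mem_map_of_mem
      (f := fun rc : Int × Int => (pyMaxL (S.map (·.2)) - rc.2, rc.1)) h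
    have e : (pyMaxL (S.map (·.2)) - (pyMaxL (S.map (·.2)) - z.1), z.2) = z :=
      Prod.ext (by omega) rfl
    simpa only [e] using h2

theorem rot90_shapeMat (S : List (Int × Int)) (hS : S ≠ []) :
    rot90 (shapeMat S) = shapeMat (rotCells S) := by
  have hfstne : S.map (·.1) ≠ [] := by simpa using hS
  have hsndne : S.map (·.2) ≠ [] := by simpa using hS
  set r0 := pyMinL (S.map (·.1)) with hr0
  set r1 := pyMaxL (S.map (·.1)) with hr1d
  set c0 := pyMinL (S.map (·.2)) with hc0
  set c1 := pyMaxL (S.map (·.2)) with hc1d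
  have hr01 : r0 ≤ r1 := (pyMinL_spec _ hfstne).2 _ (pyMaxL_spec _ hfstne).1
  have hc01 : c0 ≤ c1 := (pyMinL_spec _ hsndne).2 _ (pyMaxL_spec _ hsndne).1
  set R := (r1 + 1 - r0).toNat with hRd
  set C := (c1 + 1 - c0).toNat with hCd
  have hRint : (R : Int) = r1 + 1 - r0 := by rw [hRd]; exact Int.toNat_of_nonneg (by omega)
  have hCint : (C : Int) = c1 + 1 - c0 := by rw [hCd]; exact Int.toNat_of_nonneg (by omega)
  have hfst_rot : (rotCells S).map (·.1) = (S.map (·.2)).map (fun x => c1 - x) :=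
    map_fst_rotCells S
  have hsnd_rot : (rotCells S).map (·.2) = S.map (·.1) := map_snd_rotCells S
  have e1 : pyMinL ((rotCells S).map (·.1)) = 0 := by
    rw [hfst_rot, pyMinL_map_sub _ _ hsndne]; omega
  have e2 : pyMaxL ((rotCells S).map (·.1)) = c1 - c0 := by
    rw [hfst_rot, pyMaxL_map_sub _ _ hsndne]
  have e3 : pyMinL ((rotCells S).map (·.2)) = r0 := by rw [hsnd_rot]
  have e4 : pyMaxL ((rotCells S).map (·.2)) = r1 := by rw [hsnd_rot]
  have hshape_rot : shapeMat (rotCells S) = matOf 0 (c1 - c0) r0 r1 (rotCells S) := by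
    unfold shapeMat
    rw [e1, e2, e3, e4]
  have hshape : shapeMat S = matOf r0 r1 c0 c1 S := rfl
  have hplen : (shapeMat S).length = R := by
    show (matOf r0 r1 c0 c1 S).length = R
    unfold matOf
    rw [List.length_map, PySem.List.length_pyRange_one]
  have hpne : shapeMat S ≠ [] := List.ne_nil_of_length_pos (by rw [hplen]; omega)
  have hall : ∀ row ∈ shapeMat S, row.length = C := by
    rw [hshape]; unfold matOf
    intro row hrow
    obtain ⟨r, _, rfl⟩ := List.mem_map.1 hrow
    rw [List.length_map, PySem.List.length_pyRange_one]
  have hCC : (c1 - c0 + 1 - 0).toNat = C := by omega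
  rw [hshape_rot]
  apply matEq
  · rw [mapLength_rot90 _ C hpne hall, hplen, mapLength_matOf, hCC]
  · intro r c
    rw [cellv_rot90 _ C hpne hall r c, cellv_matOf 0 (c1 - c0) r0 r1 (rotCells S) r c, hCC]
    by_cases hr : r < C
    · rw [if_pos hr, hshape, cellv_matOf r0 r1 c0 c1 S c (C - 1 - r)]
      by_cases hc : c < R
      · rw [if_pos (show c < R ∧ C - 1 - r < C from ⟨hc, by omega⟩),
            if_pos (show r < C ∧ c < R from ⟨hr, hc⟩)]
        simp only [mem_rotCells]
        have hco : c0 + ((C - 1 - r : Nat) : Int) = c1 - ((0 : Int) + (r : Int)) := by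
          have hcast : ((C - 1 - r : Nat) : Int) = (C : Int) - 1 - (r : Int) := by omega
          omega
        rw [hco]
      · rw [if_neg (by tauto), if_neg (by tauto)]
    · rw [if_neg hr, if_neg (by tauto)]

theorem cellv_replicate0 (Rn Cn : Nat) (r c : Int) :
    cellv (List.replicate Rn (List.replicate Cn (0 : Int))) r c = 0 := by
  unfold cellv
  by_cases h : r.toNat < Rn
  · rw [getD_replicate_row _ _ _ h]
    by_cases h2 : c.toNat < Cn
    · rw [List.getD_eq_getElem _ _ (by simpa using h2), List.getElem_replicate]
    · rw [List.getD_eq_default _ _ (by simpa using Nat.le_of_not_lt h2)]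
  · have hrow : (List.replicate Rn (List.replicate Cn (0 : Int))).getD r.toNat [] = [] :=
      List.getD_eq_default _ _ (by simpa using Nat.le_of_not_lt h)
    rw [hrow]
    rfl

theorem keys_of_piece (S : List (Int × Int)) (hS : S ≠ []) :
    (genRotsA (shapeMat S)).map pyStrMat = rotKeysB 4 S := by
  have h1 := rot90_shapeMat S hS
  have h2 := rot90_shapeMat _ (rotCells_ne _ hS)
  have h3 := rot90_shapeMat _ (rotCells_ne _ (rotCells_ne _ hS))
  simp only [genRotsA, rotKeysB, keyOf, h1, h2, h3]
  rfl

theorem piece_eq (m : List (List Int)) (n : Int) (seed : Int × Int)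
    (hok : GridOK n m) (hin : inb n seed) (hcell : cellv m seed.1 seed.2 = 1) :
    extractA m (dfsA (fuelA n) m n seed []) =
      (shapeMat (floodB (fuelB n) m n [seed] []).1, (floodB (fuelB n) m n [seed] []).2) ∧
    (floodB (fuelB n) m n [seed] []).1 ≠ [] ∧
    (floodB (fuelB n) m n [seed] []).2.map List.length = m.map List.length := by
  obtain ⟨a1, a2, a3, a4, a5, a6, a7⟩ :=
    (dfs_spec (fuelA n)).1 m n seed [] hin (by simp) List.nodup_nil (by simp)
      (by simp [fuelA])
  obtain ⟨c1, c2, c3, c4, c5, c6, c7⟩ :=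
    flood_spec (fuelB n) m n seed m [seed] [] hok hin hcell
      (by intro r c _ _; simp) rfl List.nodup_nil (by simp)
      (Or.inr (by simp))
      (by intro x hx; simp only [List.mem_singleton] at hx; exact Or.inl hx)
      (by simp)
      (by simp [fuelB]; omega)
  set R := dfsA (fuelA n) m n seed [] with hR
  set F := floodB (fuelB n) m n [seed] [] with hF
  have hRiff : ∀ x, x ∈ R ↔ ReachP m n seed x := by
    intro x
    constructor
    · intro hx
      rcases a7 x hx with h | h
      · simp at h
      · exact h
    · exact reach_subset_closed m n seed R a3 (fun p hp => a6 p hp (by simp)) x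
  have hFiff : ∀ x, x ∈ F.1 ↔ ReachP m n seed x := by
    intro x
    constructor
    · intro hx
      exact (c3 x hx).2.2
    · exact reach_subset_closed m n seed F.1 c4 c5 x
  have hset : ∀ x, x ∈ R ↔ x ∈ F.1 := fun x => (hRiff x).trans (hFiff x).symm
  have hRne : R ≠ [] := List.ne_nil_of_mem a3
  have hFne : F.1 ≠ [] := List.ne_nil_of_mem c4
  -- the four extrema agree
  have hmapne1 : R.map (fun p : Int × Int => p.1) ≠ [] := by
    simp only [ne_eq, List.map_eq_nil_iff]; exact hRne
  have hmapne2 : F.1.map (fun p : Int × Int => p.1) ≠ [] := by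
    simp only [ne_eq, List.map_eq_nil_iff]; exact hFne
  have hmapne3 : R.map (fun p : Int × Int => p.2) ≠ [] := by
    simp only [ne_eq, List.map_eq_nil_iff]; exact hRne
  have hmapne4 : F.1.map (fun p : Int × Int => p.2) ≠ [] := by
    simp only [ne_eq, List.map_eq_nil_iff]; exact hFne
  have hmemmap1 : ∀ a, a ∈ R.map (fun p : Int × Int => p.1) ↔
      a ∈ F.1.map (fun p : Int × Int => p.1) := by
    intro a
    simp only [List.mem_map]
    exact ⟨fun ⟨p, hp, he⟩ => ⟨p, (hset p).1 hp, he⟩, fun ⟨p, hp, he⟩ => ⟨p, (hset p).2 hp, he⟩⟩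
  have hmemmap2 : ∀ a, a ∈ R.map (fun p : Int × Int => p.2) ↔
      a ∈ F.1.map (fun p : Int × Int => p.2) := by
    intro a
    simp only [List.mem_map]
    exact ⟨fun ⟨p, hp, he⟩ => ⟨p, (hset p).1 hp, he⟩, fun ⟨p, hp, he⟩ => ⟨p, (hset p).2 hp, he⟩⟩
  have hr1 : pyMinL (R.map (fun p : Int × Int => p.1)) =
      pyMinL (F.1.map (fun p : Int × Int => p.1)) := pyMinL_congr _ _ hmapne1 hmapne2 hmemmap1
  have hr2 : pyMaxL (R.map (fun p : Int × Int => p.1)) =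
      pyMaxL (F.1.map (fun p : Int × Int => p.1)) := pyMaxL_congr _ _ hmapne1 hmapne2 hmemmap1
  have hc1 : pyMinL (R.map (fun p : Int × Int => p.2)) =
      pyMinL (F.1.map (fun p : Int × Int => p.2)) := pyMinL_congr _ _ hmapne3 hmapne4 hmemmap2
  have hc2 : pyMaxL (R.map (fun p : Int × Int => p.2)) =
      pyMaxL (F.1.map (fun p : Int × Int => p.2)) := pyMaxL_congr _ _ hmapne3 hmapne4 hmemmap2
  set r1 := pyMinL (R.map (fun p : Int × Int => p.1)) with hdr1
  set r2 := pyMaxL (R.map (fun p : Int × Int => p.1)) with hdr2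
  set c1' := pyMinL (R.map (fun p : Int × Int => p.2)) with hdc1
  set c2' := pyMaxL (R.map (fun p : Int × Int => p.2)) with hdc2
  obtain ⟨hminmem1, hminle1⟩ := pyMinL_spec _ hmapne1
  obtain ⟨hmaxmem1, hmaxle1⟩ := pyMaxL_spec _ hmapne1
  obtain ⟨hminmem2, hminle2⟩ := pyMinL_spec _ hmapne3
  obtain ⟨hmaxmem2, hmaxle2⟩ := pyMaxL_spec _ hmapne3
  have hboundsR : ∀ x ∈ R, r1 ≤ x.1 ∧ x.1 ≤ r2 ∧ c1' ≤ x.2 ∧ x.2 ≤ c2' := by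
    intro x hx
    exact ⟨hminle1 _ (List.mem_map_of_mem hx), hmaxle1 _ (List.mem_map_of_mem hx),
      hminle2 _ (List.mem_map_of_mem hx), hmaxle2 _ (List.mem_map_of_mem hx)⟩
  set z : List (List Int) :=
    List.replicate (r2 - r1 + 1).toNat (List.replicate (c2' - c1' + 1).toNat 0) with hz
  have hzlen : z.length = (r2 - r1 + 1).toNat := by rw [hz, List.length_replicate]
  have hzrow : ∀ i : Nat, i < (r2 - r1 + 1).toNat →
      (z.getD i []).length = (c2' - c1' + 1).toNat := by
    intro i hi
    rw [hz, getD_replicate_row _ _ _ hi, List.length_replicate]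
  have hpaintin : ∀ x ∈ R, 0 ≤ x.1 - r1 ∧ (x.1 - r1).toNat < z.length ∧ 0 ≤ x.2 - c1' ∧
      (x.2 - c1').toNat < ((z.getD (x.1 - r1).toNat []).length) := by
    intro x hx
    obtain ⟨b1, b2, b3, b4⟩ := hboundsR x hx
    have h1 : 0 ≤ x.1 - r1 := by omega
    have h2 : (x.1 - r1).toNat < (r2 - r1 + 1).toNat := by omega
    have h3 : 0 ≤ x.2 - c1' := by omega
    refine ⟨h1, by rw [hzlen]; exact h2, h3, ?_⟩
    rw [hzrow _ h2]
    omega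
  have hshapeF : shapeMat F.1 = matOf r1 r2 c1' c2' F.1 := by
    unfold shapeMat
    rw [← hr1, ← hr2, ← hc1, ← hc2]
  have hpuz : R.foldl (fun pz rc => setc pz (rc.1 - r1) (rc.2 - c1') 1) z = shapeMat F.1 := by
    rw [hshapeF]
    apply matEq
    · rw [paintFold_mapLength, hz, List.map_replicate, List.length_replicate, mapLength_matOf,
          show (r2 + 1 - r1).toNat = (r2 - r1 + 1).toNat from by omega,
          show (c2' + 1 - c1').toNat = (c2' - c1' + 1).toNat from by omega]
    · intro r c
      rw [cellv_paintFold R z r1 c1' 1 hpaintin _ _ (by positivity) (by positivity),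
          cellv_matOf r1 r2 c1' c2' F.1 r c]
      simp only [show ((r : Int) + r1, (c : Int) + c1') = (r1 + (r : Int), c1' + (c : Int)) from
        Prod.ext (by ring) (by ring)]
      rw [hz, cellv_replicate0]
      by_cases hmem : (r1 + (r : Int), c1' + (c : Int)) ∈ R
      · obtain ⟨b1, b2, b3, b4⟩ := hboundsR _ hmem
        rw [if_pos hmem,
            if_pos (show r < (r2 + 1 - r1).toNat ∧ c < (c2' + 1 - c1').toNat from by
              constructor <;> [skip; skip] <;> omega),
            if_pos ((hset _).1 hmem)]
      · have hmemF : (r1 + (r : Int), c1' + (c : Int)) ∉ F.1 := fun hx => hmem ((hset _).2 hx)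
        rw [if_neg hmem]
        by_cases hb : r < (r2 + 1 - r1).toNat ∧ c < (c2' + 1 - c1').toNat
        · rw [if_pos hb, if_neg hmemF]
        · rw [if_neg hb]
  have hzeroin : ∀ x ∈ R, 0 ≤ x.1 ∧ x.1.toNat < m.length ∧ 0 ≤ x.2 ∧
      x.2.toNat < ((m.getD x.1.toNat []).length) := by
    intro x hx
    have hxin := a5 x hx
    obtain ⟨e1, e2, e3, e4⟩ := hxin
    have hb1 := hok.1
    have hb2 := hok.2 x.1.toNat (by omega)
    exact ⟨e1, by omega, e3, by omega⟩
  have hmap : R.foldl (fun g rc => setc g rc.1 rc.2 0) m = F.2 := by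
    apply matEq
    · rw [zeroFold_mapLength, c7]
    · intro r c
      rw [cellv_zeroFold R m hzeroin _ _ (by positivity) (by positivity),
          c6 _ _ (by positivity) (by positivity)]
      rw [if_congr (hset _) rfl rfl]
  refine ⟨?_, hFne, c7⟩
  show extractA m R = (shapeMat F.1, F.2)
  unfold extractA
  rw [PySem.List.foldl_prod_mk
    (f := fun pz (rc : Int × Int) => setc pz (rc.1 - r1) (rc.2 - c1') 1)
    (g := fun mp (rc : Int × Int) => setc mp rc.1 rc.2 0)]
  rw [← hdr1, ← hdr2, ← hdc1, ← hdc2, ← hz]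
  rw [hpuz, hmap]

-- ----- splitting A's interleaved scan into its two independent passes -----

theorem foldl_split4 {α β γ δ ε : Type} (f : α × γ → ε → α × γ) (g : β × δ → ε → β × δ)
    (l : List ε) (a : α) (b : β) (c : γ) (d : δ) :
    l.foldl (fun st x => ((f (st.1, st.2.2.1) x).1, (g (st.2.1, st.2.2.2) x).1,
      (f (st.1, st.2.2.1) x).2, (g (st.2.1, st.2.2.2) x).2)) (a, b, c, d) =
    ((l.foldl f (a, c)).1, (l.foldl g (b, d)).1, (l.foldl f (a, c)).2, (l.foldl g (b, d)).2) := by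
  induction l generalizing a b c d with
  | nil => rfl
  | cons x t ih =>
    simp only [List.foldl_cons]
    exact ih (f (a, c) x).1 (g (b, d) x).1 (f (a, c) x).2 (g (b, d) x).2

def tabColsA (n row : Int) (p : List (List Int) × List (List String)) :
    List (List Int) × List (List String) :=
  (PySem.List.pyRange 0 n 1).foldl (fun p col => tabStepA n row col p.1 p.2) p

def brdColsA (n row : Int) (p : List (List Int) × List String) :
    List (List Int) × List String :=
  (PySem.List.pyRange 0 n 1).foldl (fun p col => brdStepA n row col p.1 p.2) p

def tabRowsA (n : Int) (p : List (List Int) × List (List String)) :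
    List (List Int) × List (List String) :=
  (PySem.List.pyRange 0 n 1).foldl (fun p row => tabColsA n row p) p

def brdRowsA (n : Int) (p : List (List Int) × List String) :
    List (List Int) × List String :=
  (PySem.List.pyRange 0 n 1).foldl (fun p row => brdColsA n row p) p

theorem scan_split (n : Int) (t g : List (List Int)) :
    (PySem.List.pyRange 0 n 1).foldl
      (fun st row => (PySem.List.pyRange 0 n 1).foldl (fun st col => scanStepA n row col st) st)
      (t, g, ([] : List (List String)), ([] : List String)) =
    ((tabRowsA n (t, [])).1, (brdRowsA n (g, [])).1,
     (tabRowsA n (t, [])).2, (brdRowsA n (g, [])).2) := by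
  have hstep : ∀ (st : List (List Int) × List (List Int) × List (List String) × List String)
      (row : Int),
      (PySem.List.pyRange 0 n 1).foldl (fun st col => scanStepA n row col st) st =
      ((tabColsA n row (st.1, st.2.2.1)).1, (brdColsA n row (st.2.1, st.2.2.2)).1,
       (tabColsA n row (st.1, st.2.2.1)).2, (brdColsA n row (st.2.1, st.2.2.2)).2) :=
    fun st row => foldl_split4 (fun p col => tabStepA n row col p.1 p.2)
      (fun p col => brdStepA n row col p.1 p.2) _ st.1 st.2.1 st.2.2.1 st.2.2.2
  rw [show (fun (st : List (List Int) × List (List Int) × List (List String) × List String)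
        (row : Int) =>
        (PySem.List.pyRange 0 n 1).foldl (fun st col => scanStepA n row col st) st) =
      (fun st row =>
        ((tabColsA n row (st.1, st.2.2.1)).1, (brdColsA n row (st.2.1, st.2.2.2)).1,
         (tabColsA n row (st.1, st.2.2.1)).2, (brdColsA n row (st.2.1, st.2.2.2)).2)) from
    funext fun st => funext fun row => hstep st row]
  exact foldl_split4 (fun p row => tabColsA n row p) (fun p row => brdColsA n row p) _ t g [] []

-- ----- the table pass: B's flood-and-rotate-keys step equals A's dfs-and-matrix step -----

theorem tabStep_pass (n row col : Int) (tb : List (List Int)) (tp : List (List String))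
    (hok : GridOK n tb) (hrow : 0 ≤ row ∧ row < n) (hcol : 0 ≤ col ∧ col < n) :
    tabStepB n row col (tb, tp) = tabStepA n row col tb tp ∧
    GridOK n (tabStepA n row col tb tp).1 := by
  unfold tabStepA tabStepB
  by_cases gt : cellv tb row col = 1
  · rw [if_pos gt, if_pos gt]
    dsimp only
    obtain ⟨hext, hFne, hflen⟩ :=
      piece_eq tb n (row, col) hok ⟨hrow.1, hrow.2, hcol.1, hcol.2⟩ gt
    have h1 : (extractA tb (dfsA (fuelA n) tb n (row, col) [])).1 =
        shapeMat (floodB (fuelB n) tb n [(row, col)] []).1 := by rw [hext]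
    have h2 : (extractA tb (dfsA (fuelA n) tb n (row, col) [])).2 =
        (floodB (fuelB n) tb n [(row, col)] []).2 := by rw [hext]
    constructor
    · rw [h1, h2, keys_of_piece _ hFne]
    · rw [h2]
      exact GridOK_of_mapLength n _ tb hflen hok
  · rw [if_neg gt, if_neg gt]
    exact ⟨rfl, hok⟩

theorem tabCols_pass (n row : Int) (cols : List Int) (hcols : ∀ c ∈ cols, 0 ≤ c ∧ c < n)
    (hrow : 0 ≤ row ∧ row < n) :
    ∀ p : List (List Int) × List (List String), GridOK n p.1 →
      cols.foldl (fun p col => tabStepB n row col p) p =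
        cols.foldl (fun p col => tabStepA n row col p.1 p.2) p ∧
      GridOK n (cols.foldl (fun p col => tabStepA n row col p.1 p.2) p).1 := by
  induction cols with
  | nil => intro p h; exact ⟨rfl, h⟩
  | cons cl t ih =>
    intro p h
    obtain ⟨hs, hok'⟩ := tabStep_pass n row cl p.1 p.2 h hrow (hcols cl List.mem_cons_self)
    have hs' : tabStepB n row cl p = tabStepA n row cl p.1 p.2 := hs
    rw [List.foldl_cons, List.foldl_cons, hs']
    exact ih (fun c hc => hcols c (List.mem_cons_of_mem _ hc)) _ hok'

theorem tabRows_pass (n : Int) (rows : List Int) (hrows : ∀ r ∈ rows, 0 ≤ r ∧ r < n) :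
    ∀ p : List (List Int) × List (List String), GridOK n p.1 →
      rows.foldl (fun p row =>
          (PySem.List.pyRange 0 n 1).foldl (fun p col => tabStepB n row col p) p) p =
        rows.foldl (fun p row => tabColsA n row p) p ∧
      GridOK n (rows.foldl (fun p row => tabColsA n row p) p).1 := by
  induction rows with
  | nil => intro p h; exact ⟨rfl, h⟩
  | cons r t ih =>
    intro p h
    obtain ⟨hs, hok'⟩ := tabCols_pass n r (PySem.List.pyRange 0 n 1)
      (fun c hc => PySem.List.mem_pyRange_one.1 hc) (hrows r List.mem_cons_self) p h
    rw [List.foldl_cons, List.foldl_cons, hs]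
    exact ih (fun x hx => hrows x (List.mem_cons_of_mem _ hx)) _ hok'

-- ----- the board pass: B counts keys directly; A collects them and counts afterwards -----

theorem brdStep_pass (n row col : Int) (gb : List (List Int)) (bp : List String)
    (hok : GridOK n gb) (hrow : 0 ≤ row ∧ row < n) (hcol : 0 ≤ col ∧ col < n) :
    brdStepB n row col (gb, countFold bp) =
      ((brdStepA n row col gb bp).1, countFold (brdStepA n row col gb bp).2) ∧
    GridOK n (brdStepA n row col gb bp).1 := by
  unfold brdStepA brdStepB
  by_cases gg : cellv gb row col = 1
  · rw [if_pos gg, if_pos gg]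
    dsimp only
    obtain ⟨hext, hFne, hflen⟩ :=
      piece_eq gb n (row, col) hok ⟨hrow.1, hrow.2, hcol.1, hcol.2⟩ gg
    have h1 : (extractA gb (dfsA (fuelA n) gb n (row, col) [])).1 =
        shapeMat (floodB (fuelB n) gb n [(row, col)] []).1 := by rw [hext]
    have h2 : (extractA gb (dfsA (fuelA n) gb n (row, col) [])).2 =
        (floodB (fuelB n) gb n [(row, col)] []).2 := by rw [hext]
    constructor
    · rw [h1, h2, countFold_append]
      rfl
    · rw [h2]
      exact GridOK_of_mapLength n _ gb hflen hok
  · rw [if_neg gg, if_neg gg]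
    exact ⟨rfl, hok⟩

theorem brdCols_pass (n row : Int) (cols : List Int) (hcols : ∀ c ∈ cols, 0 ≤ c ∧ c < n)
    (hrow : 0 ≤ row ∧ row < n) :
    ∀ (gb : List (List Int)) (bp : List String), GridOK n gb →
      cols.foldl (fun st col => brdStepB n row col st) (gb, countFold bp) =
        ((cols.foldl (fun p col => brdStepA n row col p.1 p.2) (gb, bp)).1,
         countFold (cols.foldl (fun p col => brdStepA n row col p.1 p.2) (gb, bp)).2) ∧
      GridOK n (cols.foldl (fun p col => brdStepA n row col p.1 p.2) (gb, bp)).1 := by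
  induction cols with
  | nil => intro gb bp h; exact ⟨rfl, h⟩
  | cons cl t ih =>
    intro gb bp h
    obtain ⟨hs, hok'⟩ := brdStep_pass n row cl gb bp h hrow (hcols cl List.mem_cons_self)
    rw [List.foldl_cons, List.foldl_cons, hs]
    exact ih (fun c hc => hcols c (List.mem_cons_of_mem _ hc))
      (brdStepA n row cl gb bp).1 (brdStepA n row cl gb bp).2 hok'

theorem brdRows_pass (n : Int) (rows : List Int) (hrows : ∀ r ∈ rows, 0 ≤ r ∧ r < n) :
    ∀ (gb : List (List Int)) (bp : List String), GridOK n gb →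
      rows.foldl (fun st row =>
          (PySem.List.pyRange 0 n 1).foldl (fun st col => brdStepB n row col st) st)
        (gb, countFold bp) =
        ((rows.foldl (fun p row => brdColsA n row p) (gb, bp)).1,
         countFold (rows.foldl (fun p row => brdColsA n row p) (gb, bp)).2) ∧
      GridOK n (rows.foldl (fun p row => brdColsA n row p) (gb, bp)).1 := by
  induction rows with
  | nil => intro gb bp h; exact ⟨rfl, h⟩
  | cons r t ih =>
    intro gb bp h
    obtain ⟨hs, hok'⟩ := brdCols_pass n r (PySem.List.pyRange 0 n 1)
      (fun c hc => PySem.List.mem_pyRange_one.1 hc) (hrows r List.mem_cons_self) gb bp h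
    rw [List.foldl_cons, List.foldl_cons, hs]
    exact ih (fun x hx => hrows x (List.mem_cons_of_mem _ hx))
      (brdColsA n r (gb, bp)).1 (brdColsA n r (gb, bp)).2 hok'

-- ----- the greedy matching loop -----

theorem tryRots_eq_matchStep (keys : List String) (st : Int × PySem.Dict String Int) :
    tryRots keys st = matchStep st keys := by
  induction keys with
  | nil => rfl
  | cons k rest ih =>
    have e : tryRots (k :: rest) st =
        (if PySem.Dict.getD st.2 k 0 > 0 then
          (st.1 + (PySem.Str.count k "1" : Int),
           PySem.Dict.insert st.2 k (PySem.Dict.getD st.2 k 0 - 1))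
        else tryRots rest st) := rfl
    rw [e]
    by_cases h : PySem.Dict.getD st.2 k 0 > 0
    · rw [if_pos h]
      unfold matchStep
      rw [List.find?_cons_of_pos (by simpa using h)]
    · rw [if_neg h, ih]
      unfold matchStep
      rw [List.find?_cons_of_neg (by simpa using h)]

theorem foldl_matchStep_eq (l : List (List String)) :
    ∀ st : Int × PySem.Dict String Int,
      l.foldl matchStep st = l.foldl (fun st rots => tryRots rots st) st := by
  induction l with
  | nil => intro st; rfl
  | cons k t ih =>
    intro st
    rw [List.foldl_cons, List.foldl_cons, tryRots_eq_matchStep, ih]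

-- ===== VERDICT (by name: the statement is the Claim_ definition above) =====
theorem solution_spec : Claim_equal_solution := by
  intro game_board table _hdom hpre
  unfold Spec_solution
  simp only [solution, solution_alt]
  have hokT : GridOK (table.length : Int) table := GridOK_of_pre_table _ _ hpre
  have hokG0 : GridOK (table.length : Int) game_board := GridOK_of_pre_board _ _ hpre
  have hokG : GridOK (table.length : Int) (invertN (table.length : Int) game_board) :=
    GridOK_of_mapLength _ _ game_board (mapLength_invertN _ _) hokG0
  rw [scan_split (table.length : Int) table (invertN (table.length : Int) game_board)]
  obtain ⟨ht, _⟩ := tabRows_pass (table.length : Int) (PySem.List.pyRange 0 (table.length : Int) 1)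
    (fun r hr => PySem.List.mem_pyRange_one.1 hr) (table, ([] : List (List String))) hokT
  obtain ⟨hb, _⟩ := brdRows_pass (table.length : Int) (PySem.List.pyRange 0 (table.length : Int) 1)
    (fun r hr => PySem.List.mem_pyRange_one.1 hr) (invertN (table.length : Int) game_board) [] hokG
  have ht' : (PySem.List.pyRange 0 (table.length : Int) 1).foldl
      (fun st row => (PySem.List.pyRange 0 (table.length : Int) 1).foldl
        (fun st col => tabStepB (table.length : Int) row col st) st)
      (table, ([] : List (List String))) = tabRowsA (table.length : Int) (table, []) := ht
  have hb' : (PySem.List.pyRange 0 (table.length : Int) 1).foldl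
      (fun st row => (PySem.List.pyRange 0 (table.length : Int) 1).foldl
        (fun st col => brdStepB (table.length : Int) row col st) st)
      (invertN (table.length : Int) game_board, (PySem.Dict.empty : PySem.Dict String Int)) =
      ((brdRowsA (table.length : Int) (invertN (table.length : Int) game_board, [])).1,
       countFold (brdRowsA (table.length : Int)
         (invertN (table.length : Int) game_board, [])).2) := hb
  rw [ht', hb', foldl_matchStep_eq]
  rfl
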